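-- pv_equiv track=rewrite | github.com/unhhyyeexx/ProblemSolving | 프로그래머스/2/17679. ［1차］ 프렌즈4블록/［1차］ 프렌즈4블록.py | solution
-- ===== SOURCE A (Python) =====
-- import copy
--
-- def bang(m, n, board):
--     dir = [[0,1], [1,0], [1,1]]
--     newboard = copy.deepcopy(board)
--     bangs = 0
--     for i in range(m-1):
--         for j in range(n-1):
--             now = board[i][j]
--             if not now:
--                 continue
--             flag = 0
--             for di, dj in dir:
--                 ni, nj = i+di, j+dj
--                 if 0<=ni<m and 0<=nj<n and board[ni][nj] == now:
--                     flag +=1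
--             if flag == 3:
--                 bangs += 1
--                 newboard[i][j], newboard[i+1][j], newboard[i][j+1], newboard[i+1][j+1] = 0,0,0,0
--     if not bangs:
--         return newboard, False
--     return newboard, True
--
-- def slide(m, n, board):
--     for i in range(n):
--         down = 0
--         for j in range(m-1, -1, -1):
--             if board[j][i] == 0:
--                 down += 1
--             else:
--                 if not down:
--                     continue
--                 else:
--                     board[j+down][i] = board[j][i]
--                     board[j][i] = 0
--     return board
--
-- def solution(m, n, board):
--     answer = 0
--     board = [list(a) for a in board]
--     while True:
--         maps, flag = bang(m, n, board)
--         if not flag: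
--             break
--         board = slide(m, n, maps)
--     for i in range(m):
--         answer += board[i].count(0)
--     return answer
-- ===== SOURCE B (Python) =====
-- def solution(m, n, board):
--     # Column-stack representation: each column is kept as its letters bottom-up,
--     # so gravity is implicit (removing marked letters lets the rest fall) and
--     # removed cells are counted incrementally instead of counting zeros at the end.
--     if m < 2 or n < 2:
--         return 0
--     cols = [[board[r][c] for r in range(m - 1, -1, -1)] for c in range(n)]
--     removed = 0
--     while True:
--         marks = [set() for _ in range(n)]
--         for c in range(n - 1):
--             a, b = cols[c], cols[c + 1]
--             for h in range(min(len(a), len(b)) - 1):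
--                 if a[h] == a[h + 1] == b[h] == b[h + 1]:
--                     marks[c].update((h, h + 1))
--                     marks[c + 1].update((h, h + 1))
--         if not any(marks):
--             return removed
--         removed += sum(len(s) for s in marks)
--         cols = [[v for h, v in enumerate(col) if h not in marked]
--                 for col, marked in zip(cols, marks)]
-- ===== Notes on version B (the rewrite author's own statement) =====
-- stated objective: alternative
-- what changed: B drops A's grid-with-zeros simulation: each column is kept as a bottom-up stack of its letters, so A's swap-down gravity pass disappears (removing marked letters lets the rest fall implicitly), blocks are detected per adjacent column pair at stack heights, and the answer is accumulated incrementally as letters are removed instead of counting zeros in a final pass; a guard returns 0 outright when m<2 or n<2 since no 2x2 block fits.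
import Mathlib
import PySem

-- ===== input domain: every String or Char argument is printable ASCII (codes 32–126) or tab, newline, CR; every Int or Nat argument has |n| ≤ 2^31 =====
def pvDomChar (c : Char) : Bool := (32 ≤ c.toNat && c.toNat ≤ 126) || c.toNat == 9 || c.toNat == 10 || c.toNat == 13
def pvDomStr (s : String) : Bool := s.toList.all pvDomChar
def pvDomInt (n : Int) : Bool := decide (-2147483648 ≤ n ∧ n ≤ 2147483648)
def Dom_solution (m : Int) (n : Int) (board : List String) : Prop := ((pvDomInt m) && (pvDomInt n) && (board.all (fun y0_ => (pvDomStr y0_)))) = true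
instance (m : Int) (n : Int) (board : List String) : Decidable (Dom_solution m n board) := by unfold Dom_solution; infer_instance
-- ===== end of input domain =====

-- B replaces A's grid of 0/letter cells, dual-buffer block marking, swap-down
-- gravity pass and final zero count by a column-stack representation (each column
-- kept bottom-up), where gravity is implicit in removing marked letters and the
-- removed cells are counted incrementally (alternative decomposition, same cost).

-- ===== PORT A =====
-- A board cell is either the int 0 (empty, `none`) or a 1-char string (`some c`).
abbrev Grid := List (List (Option Char))

-- `[list(a) for a in board]`
def toGrid (board : List String) : Grid := board.map (fun s => s.toList.map some)

-- reading `g[r][c]`, writing `g[r][c] = v` (indices in range on admitted inputs)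
def cellG (g : Grid) (r c : Nat) : Option Char := (g.getD r []).getD c none

def setG (g : Grid) (r c : Nat) (v : Option Char) : Grid :=
  g.set r ((g.getD r []).set c v)

-- bang(m, n, board): scan anchors, count equal neighbours in the three directions,
-- write the four zeros into the copy `newboard`, return (newboard, bangs != 0)
def bangA (m n : Int) (g : Grid) : Grid × Bool :=
  let idxs := (List.range (m-1).toNat).flatMap (fun i =>
    (List.range (n-1).toNat).map (fun j => (i, j)))
  let st := idxs.foldl (fun (st : Grid × Nat) p =>
    let i := p.1; let j := p.2
    let now := cellG g i j
    if now = none then st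
    else
      let flag := [((0:Nat),(1:Nat)), (1,0), (1,1)].foldl (fun f d =>
        if 0 ≤ ((i+d.1 : Nat) : Int) ∧ ((i+d.1 : Nat) : Int) < m ∧
           0 ≤ ((j+d.2 : Nat) : Int) ∧ ((j+d.2 : Nat) : Int) < n ∧
           cellG g (i+d.1) (j+d.2) = now
        then f + 1 else f) (0 : Nat)
      if flag = 3 then
        (setG (setG (setG (setG st.1 i j none) (i+1) j none) i (j+1) none) (i+1) (j+1) none,
         st.2 + 1)
      else st) (g, 0)
  (st.1, st.2 != 0)

-- slide(m, n, board): per column, scan bottom-up with a `down` counter and swap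
-- each letter down by the number of zeros seen below it
def slideA (m n : Int) (g : Grid) : Grid :=
  (List.range n.toNat).foldl (fun g c =>
    ((List.range m.toNat).reverse.foldl (fun (st : Grid × Nat) j =>
      if cellG st.1 j c = none then (st.1, st.2 + 1)
      else if st.2 = 0 then st
      else (setG (setG st.1 (j + st.2) c (cellG st.1 j c)) j c none, st.2)) (g, 0)).1) g

-- the `while True` loop of A's solution (fuel-bounded; fuel is ample for every real run)
def loopA (m n : Int) : Nat → Grid → Grid
  | 0, g => g
  | fuel+1, g =>
    let r := bangA m n g
    if r.2 then loopA m n fuel (slideA m n r.1) else g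

def solution (m : Int) (n : Int) (board : List String) : Int :=
  let g := loopA m n (m.toNat * n.toNat + 1) (toGrid board)
  (List.range m.toNat).foldl (fun a i => a + ((g.getD i []).count none : Int)) 0

-- ===== PORT B =====
-- cols[c] = column c of the board as its letters BOTTOM-UP:
-- [[board[r][c] for r in range(m-1,-1,-1)] for c in range(n)]
-- (board[r][c] ported via getD: exact here since Pre_ guarantees r < len(board), c < len(board[r]))
def colsInitB (m n : Int) (board : List String) : List (List Char) :=
  (List.range n.toNat).map (fun c =>
    (PySem.List.pyRange (m-1) (-1) (-1)).map
      (fun r => (board.getD r.toNat "").toList.getD c ' '))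

-- one round's marks: for each adjacent column pair, heights h with a 2x2 equal
-- block add {h, h+1} to both columns' sets (range(k) ported over Nat, values coincide)
def marksB (n : Int) (cols : List (List Char)) : List (PySem.Set Int) :=
  (List.range (n-1).toNat).foldl (fun marks c =>
    let a := cols.getD c []
    let b := cols.getD (c+1) []
    (List.range (min a.length b.length - 1)).foldl (fun marks h =>
      if a.getD h ' ' = a.getD (h+1) ' ' ∧ a.getD (h+1) ' ' = b.getD h ' ' ∧
         b.getD h ' ' = b.getD (h+1) ' ' then
        let marks := marks.set c (PySem.Set.update (marks.getD c PySem.Set.empty) [(h : Int), ((h : Int)+1)])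
        marks.set (c+1) (PySem.Set.update (marks.getD (c+1) PySem.Set.empty) [(h : Int), ((h : Int)+1)])
      else marks) marks)
    (List.replicate n.toNat PySem.Set.empty)

-- [[v for h, v in enumerate(col) if h not in marked] for col, marked in zip(cols, marks)]
def newColsB (cols : List (List Char)) (marks : List (PySem.Set Int)) : List (List Char) :=
  (cols.zip marks).map (fun p =>
    ((PySem.List.enumerate p.1 0).filter (fun hv => ¬ PySem.Set.contains p.2 hv.1)).map (fun hv => hv.2))

-- the `while True` loop of B (fuel-bounded; fuel is ample for every real run)
def loopB (n : Int) : Nat → List (List Char) → Int → Int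
  | 0, _, removed => removed
  | fuel+1, cols, removed =>
    let marks := marksB n cols
    if marks.all (fun s => s.isEmpty) then removed
    else loopB n fuel (newColsB cols marks) (removed + (marks.map (fun s => (s.length : Int))).sum)

def solution_alt (m : Int) (n : Int) (board : List String) : Int :=
  if m < 2 ∨ n < 2 then 0
  else loopB n (m.toNat * n.toNat + 1) (colsInitB m n board) 0

-- ===== PRECONDITION & SPEC =====
-- Pre_ excludes exactly the inputs on which A raises an IndexError: a nonnegative m
-- larger than the number of rows, or (when a 2x2 scan really happens, m ≥ 2 and n ≥ 2)
-- a row among the first m shorter than n.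
def Pre_solution (m : Int) (n : Int) (board : List String) : Prop :=
  (m < 0 ∨ m ≤ (board.length : Int)) ∧
  (2 ≤ m → 2 ≤ n → ∀ s ∈ board.take m.toNat, (n : Int) ≤ (s.length : Int))

instance (m : Int) (n : Int) (board : List String) : Decidable (Pre_solution m n board) := by
  unfold Pre_solution; infer_instance

def pvWitness_solution : Int × Int × List String := (2, 3, ["aab", "aab"])

def Spec_solution (m : Int) (n : Int) (board : List String) (out : Int) : Prop := out = solution_alt m n board
instance (m : Int) (n : Int) (board : List String) (out : Int) : Decidable (Spec_solution m n board out) := by unfold Spec_solution; infer_instance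

-- ===== CLAIM (what is proved, stated in full; the proofs are below) =====
def Claim_equal_solution : Prop := ∀ (m : Int) (n : Int) (board : List String), Dom_solution m n board → Pre_solution m n board → Spec_solution m n board (solution m n board)

-- ===== LEMMAS AND PROOFS =====

-- ---- basic grid lemmas ----

theorem set_oob {α : Type} (l : List α) (i : Nat) (a : α) (h : l.length ≤ i) : l.set i a = l := by
  induction l generalizing i with
  | nil => simp
  | cons x l ih =>
    cases i with
    | zero => simp at h
    | succ i => simp only [List.set_cons_succ]; rw [ih]; simp at h; omega

theorem getD_set' {α : Type} (l : List α) (i j : Nat) (a d : α) :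
    (l.set i a).getD j d = if j = i ∧ i < l.length then a else l.getD j d := by
  rw [List.getD_eq_getElem?_getD, List.getElem?_set]
  by_cases h1 : i = j
  · subst h1
    by_cases h2 : i < l.length <;> simp [h2, List.getD_eq_getElem?_getD]
  · have h1' : ¬ (j = i) := fun h => h1 h.symm
    simp [h1, h1', List.getD_eq_getElem?_getD]

theorem len_setG (g : Grid) (r c : Nat) (v : Option Char) : (setG g r c v).length = g.length := by
  simp [setG]

theorem getD_setG (g : Grid) (r c : Nat) (v : Option Char) (i : Nat) :
    (setG g r c v).getD i [] =
      if i = r ∧ r < g.length then (g.getD r []).set c v else g.getD i [] := by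
  simp only [setG, List.getD_eq_getElem?_getD, List.getElem?_set]
  by_cases h1 : i = r
  · by_cases h2 : r < g.length <;> simp [h1, h2]
  · have : ¬ (r = i) := fun h => h1 h.symm
    simp [h1, this]

theorem rowlen_setG (g : Grid) (r c : Nat) (v : Option Char) (i : Nat) :
    ((setG g r c v).getD i []).length = (g.getD i []).length := by
  rw [getD_setG]
  by_cases h : i = r ∧ r < g.length
  · rcases h with ⟨h1, h2⟩; simp [h1, h2]
  · simp [h]

theorem cell_setG_none (g : Grid) (r c : Nat) (r' c' : Nat) :
    cellG (setG g r c none) r' c' = if r' = r ∧ c' = c then none else cellG g r' c' := by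
  unfold cellG
  rw [getD_setG]
  by_cases h1 : r' = r
  · by_cases h2 : r < g.length
    · rw [if_pos ⟨h1, h2⟩, getD_set']
      by_cases h3 : c' = c
      · by_cases h4 : c < (g.getD r []).length
        · rw [if_pos ⟨h3, h4⟩, if_pos ⟨h1, h3⟩]
        · rw [if_neg (fun hh => h4 hh.2), if_pos ⟨h1, h3⟩, h3]
          exact List.getD_eq_default _ _ (by omega)
      · rw [if_neg (fun hh => h3 hh.1), if_neg (fun hh => h3 hh.2), h1]
    · rw [if_neg (fun hh => h2 hh.2)]
      by_cases h3 : c' = c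
      · rw [if_pos ⟨h1, h3⟩, h1, List.getD_eq_default _ _ (show g.length ≤ r by omega)]
        simp
      · rw [if_neg (fun hh => h3 hh.2)]
  · rw [if_neg (fun hh => h1 hh.1), if_neg (fun hh => h1 hh.1)]

theorem cell_setG (g : Grid) (r c : Nat) (v : Option Char) (r' c' : Nat)
    (hr : r < g.length) (hc : c < (g.getD r []).length) :
    cellG (setG g r c v) r' c' = if r' = r ∧ c' = c then v else cellG g r' c' := by
  unfold cellG
  rw [getD_setG]
  by_cases h1 : r' = r
  · rw [if_pos ⟨h1, hr⟩, getD_set']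
    by_cases h3 : c' = c
    · rw [if_pos ⟨h3, hc⟩, if_pos ⟨h1, h3⟩]
    · rw [if_neg (fun hh => h3 hh.1), if_neg (fun hh => h3 hh.2), h1]
  · rw [if_neg (fun hh => h1 hh.1), if_neg (fun hh => h1 hh.1)]

def sameShape (g₁ g₂ : Grid) : Prop :=
  g₁.length = g₂.length ∧ ∀ i, (g₁.getD i []).length = (g₂.getD i []).length

theorem sameShape_refl (g : Grid) : sameShape g g := ⟨rfl, fun _ => rfl⟩

theorem sameShape_trans {g₁ g₂ g₃ : Grid} (h : sameShape g₁ g₂) (h' : sameShape g₂ g₃) :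
    sameShape g₁ g₃ := ⟨h.1.trans h'.1, fun i => (h.2 i).trans (h'.2 i)⟩

theorem sameShape_setG (g : Grid) (r c : Nat) (v : Option Char) :
    sameShape (setG g r c v) g := ⟨len_setG g r c v, fun i => rowlen_setG g r c v i⟩

theorem grid_ext {g₁ g₂ : Grid} (hs : sameShape g₁ g₂)
    (h : ∀ r c, cellG g₁ r c = cellG g₂ r c) : g₁ = g₂ := by
  apply List.ext_getElem hs.1
  intro i hi₁ hi₂
  apply List.ext_getElem
  · have := hs.2 i
    rwa [List.getD_eq_getElem _ _ hi₁, List.getD_eq_getElem _ _ hi₂] at this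
  · intro c hc₁ hc₂
    have := h i c
    unfold cellG at this
    rwa [List.getD_eq_getElem _ _ hi₁, List.getD_eq_getElem _ _ hi₂,
      List.getD_eq_getElem _ _ hc₁, List.getD_eq_getElem _ _ hc₂] at this

-- ---- zeroing a list of cells ----

theorem cell_zeroFold (L : List (Nat × Nat)) :
    ∀ (g : Grid) (r c : Nat),
      cellG (L.foldl (fun g rc => setG g rc.1 rc.2 none) g) r c =
        if (r, c) ∈ L then none else cellG g r c := by
  induction L with
  | nil => intro g r c; simp
  | cons a L ih =>
    intro g r c
    simp only [List.foldl_cons, ih, cell_setG_none, List.mem_cons]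
    by_cases h1 : (r, c) ∈ L
    · simp [h1]
    · by_cases h2 : (r, c) = a
      · have h3 : r = a.1 ∧ c = a.2 := by rw [Prod.ext_iff] at h2; exact h2
        simp [h1, h2, h3]
      · have h3 : ¬ (r = a.1 ∧ c = a.2) := by
          intro hh; apply h2; rw [Prod.ext_iff]; exact hh
        simp [h1, h2, h3]

theorem sameShape_zeroFold (L : List (Nat × Nat)) :
    ∀ (g : Grid), sameShape (L.foldl (fun g rc => setG g rc.1 rc.2 none) g) g := by
  induction L with
  | nil => intro g; exact sameShape_refl g
  | cons a L ih =>
    intro g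
    exact sameShape_trans (ih _) (sameShape_setG g a.1 a.2 none)

-- ---- the block condition, anchors and cleared cells ----

def condB (g : Grid) (i j : Nat) : Bool :=
  decide (cellG g i j ≠ none ∧ cellG g i j = cellG g i (j+1) ∧
    cellG g i (j+1) = cellG g (i+1) j ∧ cellG g (i+1) j = cellG g (i+1) (j+1))

def idxsL (m n : Int) : List (Nat × Nat) :=
  (List.range (m-1).toNat).flatMap (fun i => (List.range (n-1).toNat).map (fun j => (i, j)))

def anchorsL (m n : Int) (g : Grid) : List (Nat × Nat) :=
  (idxsL m n).filter (fun p => condB g p.1 p.2)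

def clear4 (h : Grid) (p : Nat × Nat) : Grid :=
  setG (setG (setG (setG h p.1 p.2 none) (p.1+1) p.2 none) p.1 (p.2+1) none) (p.1+1) (p.2+1) none

def fourA (p : Nat × Nat) : List (Nat × Nat) := [(p.1, p.2), (p.1+1, p.2), (p.1, p.2+1), (p.1+1, p.2+1)]

def cellsL (m n : Int) (g : Grid) : List (Nat × Nat) := (anchorsL m n g).flatMap fourA

theorem mem_idxsL (m n : Int) (p : Nat × Nat) :
    p ∈ idxsL m n ↔ p.1 < (m-1).toNat ∧ p.2 < (n-1).toNat := by
  unfold idxsL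
  simp only [List.mem_flatMap, List.mem_map, List.mem_range]
  constructor
  · rintro ⟨i, hi, j, hj, rfl⟩; exact ⟨hi, hj⟩
  · intro ⟨h1, h2⟩; exact ⟨p.1, h1, p.2, h2, rfl⟩

theorem foldl_len {α : Type} (L : List α) : ∀ (a : Nat),
    L.foldl (fun k _ => k + 1) a = a + L.length := by
  induction L with
  | nil => intro a; simp
  | cons x L ih => intro a; simp only [List.foldl_cons, ih, List.length_cons]; omega

theorem condB_iff (g : Grid) (i j : Nat) : condB g i j = true ↔
    (cellG g i j ≠ none ∧ cellG g i (j+1) = cellG g i j ∧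
     cellG g (i+1) j = cellG g i j ∧ cellG g (i+1) (j+1) = cellG g i j) := by
  unfold condB
  rw [decide_eq_true_eq]
  constructor
  · rintro ⟨h1, h2, h3, h4⟩
    exact ⟨h1, h2.symm, (h2.trans h3).symm, ((h2.trans h3).trans h4).symm⟩
  · rintro ⟨h1, h2, h3, h4⟩
    exact ⟨h1, h2.symm, h2.trans h3.symm, h3.trans h4.symm⟩

-- A's bang clears the four cells of every anchor; the flag says "some anchor fired"
theorem bangA_eq (m n : Int) (g : Grid) :
    bangA m n g = ((anchorsL m n g).foldl clear4 g, decide (anchorsL m n g ≠ [])) := by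
  unfold bangA
  simp only []
  rw [PySem.List.foldl_congr_mem _ _
    (fun (st : Grid × Nat) p => if condB g p.1 p.2 = true then (clear4 st.1 p, st.2 + 1) else st) (g, 0)
    (by
      intro st p hp
      rw [show ((List.range (m-1).toNat).flatMap fun i =>
        (List.range (n-1).toNat).map fun j => (i, j)) = idxsL m n from rfl, mem_idxsL] at hp
      obtain ⟨hi, hj⟩ := hp
      by_cases hnow : cellG g p.1 p.2 = none
      · have hc : condB g p.1 p.2 = false := by
          simp only [condB, decide_eq_false_iff_not]; rintro ⟨h1, _⟩; exact h1 hnow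
        simp [hnow, hc]
      · simp only [hnow, if_false, List.foldl_cons, List.foldl_nil, Nat.add_zero]
        have t1 : ((0:Int) ≤ ((p.1 : Nat) : Int)) = True := eq_true (by positivity)
        have t2 : ((0:Int) ≤ ((p.1 + 1 : Nat) : Int)) = True := eq_true (by positivity)
        have t3 : ((0:Int) ≤ ((p.2 : Nat) : Int)) = True := eq_true (by positivity)
        have t4 : ((0:Int) ≤ ((p.2 + 1 : Nat) : Int)) = True := eq_true (by positivity)
        have t5 : (((p.1 : Nat) : Int) < m) = True := eq_true (by push_cast; omega)
        have t6 : (((p.1 + 1 : Nat) : Int) < m) = True := eq_true (by push_cast; omega)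
        have t7 : (((p.2 : Nat) : Int) < n) = True := eq_true (by push_cast; omega)
        have t8 : (((p.2 + 1 : Nat) : Int) < n) = True := eq_true (by push_cast; omega)
        simp only [t1, t2, t3, t4, t5, t6, t7, t8, true_and]
        by_cases c1 : cellG g p.1 (p.2 + 1) = cellG g p.1 p.2 <;>
        by_cases c2 : cellG g (p.1 + 1) p.2 = cellG g p.1 p.2 <;>
        by_cases c3 : cellG g (p.1 + 1) (p.2 + 1) = cellG g p.1 p.2 <;>
        simp only [c1, c2, c3, if_true, if_false] <;>
        first
          | (have hcb : condB g p.1 p.2 = true :=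
               (condB_iff g p.1 p.2).2 ⟨hnow, c1, c2, c3⟩
             norm_num [hcb, clear4])
          | (have hcb : ¬ (condB g p.1 p.2 = true) := by
               rw [condB_iff]
               rintro ⟨_, w1, w2, w3⟩
               first | exact c1 w1 | exact c2 w2 | exact c3 w3
             norm_num [hcb]))]
  rw [PySem.List.foldl_ite_eq_foldl_filter (fun p : Nat × Nat => condB g p.1 p.2 = true)
    (fun (st : Grid × Nat) p => (clear4 st.1 p, st.2 + 1))]
  rw [PySem.List.foldl_prod_mk (f := fun (h : Grid) (p : Nat × Nat) => clear4 h p)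
    (g := fun (k : Nat) (_ : Nat × Nat) => k + 1)]
  have hfilter : (List.filter (fun x => decide (condB g x.1 x.2 = true))
      ((List.range (m-1).toNat).flatMap (fun i => (List.range (n-1).toNat).map (fun j => (i, j)))))
      = anchorsL m n g := by
    unfold anchorsL idxsL
    congr 1
    funext x
    simp
  rw [hfilter, foldl_len]
  cases h : anchorsL m n g <;> simp [h]

theorem foldl_clear4 (L : List (Nat × Nat)) : ∀ (g : Grid),
    L.foldl clear4 g = (L.flatMap fourA).foldl (fun g rc => setG g rc.1 rc.2 none) g := by
  induction L with
  | nil => intro g; simp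
  | cons a L ih =>
    intro g
    rw [List.foldl_cons, List.flatMap_cons, List.foldl_append, ih]
    rfl

-- grid after one bang: every cell of cellsL zeroed
def zeroG (m n : Int) (g : Grid) : Grid :=
  (cellsL m n g).foldl (fun g rc => setG g rc.1 rc.2 none) g

theorem bang_grid (m n : Int) (g : Grid) : (bangA m n g).1 = zeroG m n g := by
  rw [bangA_eq]
  exact foldl_clear4 _ _

theorem bang_flag (m n : Int) (g : Grid) :
    (bangA m n g).2 = decide (anchorsL m n g ≠ []) := by
  rw [bangA_eq]

theorem sameShape_zeroG (m n : Int) (g : Grid) : sameShape (zeroG m n g) g :=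
  sameShape_zeroFold _ g

theorem cell_zeroG (m n : Int) (g : Grid) (r c : Nat) :
    cellG (zeroG m n g) r c = if (r, c) ∈ cellsL m n g then none else cellG g r c :=
  cell_zeroFold _ g r c

-- ---- gravity (A's slide rewritten column by column) ----

def WF (m n : Int) (g : Grid) : Prop :=
  m.toNat ≤ g.length ∧ ∀ r, r < m.toNat → n.toNat ≤ (g.getD r []).length

def colOf (g : Grid) (c k : Nat) : List (Option Char) :=
  (List.range k).map (fun r => cellG g r c)

theorem length_colOf (g : Grid) (c k : Nat) : (colOf g c k).length = k := by
  simp [colOf]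

theorem getElem_colOf (g : Grid) (c k r : Nat) (h : r < (colOf g c k).length) :
    (colOf g c k)[r] = cellG g r c := by
  simp [colOf]

theorem colOf_setG (g : Grid) (r c : Nat) (v : Option Char) (k : Nat)
    (hr : r < g.length) (hc : c < (g.getD r []).length) :
    colOf (setG g r c v) c k = (colOf g c k).set r v := by
  apply List.ext_getElem
  · simp [length_colOf]
  · intro t h1 h2
    rw [getElem_colOf, List.getElem_set, cell_setG g r c v t c hr hc]
    by_cases ht : r = t
    · simp [ht]
    · rw [if_neg (show ¬ (t = r ∧ c = c) from fun hh => ht hh.1.symm), if_neg ht, getElem_colOf]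

def stepS (c : Nat) : Grid × Nat → Nat → Grid × Nat := fun st j =>
  if cellG st.1 j c = none then (st.1, st.2 + 1)
  else if st.2 = 0 then st
  else (setG (setG st.1 (j + st.2) c (cellG st.1 j c)) j c none, st.2)

theorem slideA_rfl (m n : Int) (g : Grid) :
    slideA m n g = (List.range n.toNat).foldl
      (fun g c => ((List.range m.toNat).reverse.foldl (stepS c) (g, 0)).1) g := rfl

theorem slide_inv (c mm : Nat) :
    ∀ (t : Nat) (d : Nat) (g : Grid) (w : List (Option Char)),
      t ≤ mm → mm ≤ g.length → (∀ r, r < mm → c < (g.getD r []).length) →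
      (colOf g c mm).drop t = List.replicate d none ++ w →
      (∀ x ∈ w, x ≠ none) →
      sameShape (((List.range t).reverse.foldl (stepS c) (g, d)).1) g ∧
      (∀ r c', c' ≠ c → cellG (((List.range t).reverse.foldl (stepS c) (g, d)).1) r c' = cellG g r c') ∧
      (∀ r, mm ≤ r → cellG (((List.range t).reverse.foldl (stepS c) (g, d)).1) r c = cellG g r c) ∧
      colOf (((List.range t).reverse.foldl (stepS c) (g, d)).1) c mm =
        List.replicate (((colOf g c mm).take t).count none + d) none ++
          ((colOf g c mm).take t).filter (fun v => v ≠ none) ++ w := by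
  intro t
  induction t with
  | zero =>
    intro d g w _ _ _ hdrop _
    simp only [List.range_zero, List.reverse_nil, List.foldl_nil]
    have h0 := hdrop
    rw [List.drop_zero] at h0
    refine ⟨sameShape_refl g, fun _ _ _ => trivial, fun _ _ => trivial, ?_⟩
    simp only [List.take_zero, List.count_nil, List.filter_nil, Nat.zero_add, List.append_nil]
    rw [h0]
  | succ t ih =>
    intro d g w htm hml hrow hdrop hw
    have hts : t < (colOf g c mm).length := by rw [length_colOf]; omega
    have hdropt : (colOf g c mm).drop t = (colOf g c mm)[t] :: (colOf g c mm).drop (t+1) :=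
      List.drop_eq_getElem_cons hts
    have hcell : (colOf g c mm)[t] = cellG g t c := getElem_colOf g c mm t hts
    have htake : (colOf g c mm).take (t+1) = (colOf g c mm).take t ++ [cellG g t c] := by
      rw [List.take_succ, List.getElem?_eq_getElem hts, hcell]
      rfl
    rw [List.range_succ, List.reverse_append]
    simp only [List.reverse_cons, List.reverse_nil, List.nil_append, List.singleton_append,
      List.foldl_cons]
    by_cases hv : cellG g t c = none
    · have hstep : stepS c (g, d) t = (g, d + 1) := by simp [stepS, hv]
      rw [hstep]
      have hdrop' : (colOf g c mm).drop t = List.replicate (d+1) none ++ w := by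
        rw [hdropt, hdrop, hcell, hv, List.replicate_succ]
        rfl
      obtain ⟨ha, hb, hc2, hcol⟩ := ih (d+1) g w (by omega) hml hrow hdrop' hw
      refine ⟨ha, hb, hc2, ?_⟩
      have hc1 : List.count (none : Option Char) [(none : Option Char)] = 1 := by simp
      have hf1 : List.filter (fun v => decide (v ≠ none)) [(none : Option Char)] = [] := by simp
      rw [hcol, htake, hv, List.count_append, List.filter_append, hc1, hf1, List.append_nil]
      have e : ((colOf g c mm).take t).count (none : Option Char) + 1 + d =
          ((colOf g c mm).take t).count (none : Option Char) + (d + 1) := by omega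
      rw [e]
    · by_cases hd : d = 0
      · subst hd
        have hstep : stepS c (g, 0) t = (g, 0) := by simp [stepS, hv]
        rw [hstep]
        have hdrop' : (colOf g c mm).drop t = List.replicate 0 none ++ (cellG g t c :: w) := by
          rw [hdropt, hdrop, hcell]
          simp
        have hw' : ∀ x ∈ cellG g t c :: w, x ≠ none := by
          intro x hx
          rcases List.mem_cons.1 hx with rfl | hx'
          · exact hv
          · exact hw x hx'
        obtain ⟨ha, hb, hc2, hcol⟩ := ih 0 g (cellG g t c :: w) (by omega) hml hrow hdrop' hw'
        refine ⟨ha, hb, hc2, ?_⟩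
        have hcv : List.count (none : Option Char) [cellG g t c] = 0 := by
          rw [List.count_eq_zero]
          simp only [List.mem_singleton]
          intro hh; exact hv hh.symm
        have hfv : List.filter (fun v => decide (v ≠ none)) [cellG g t c] = [cellG g t c] := by
          simp [hv]
        rw [hcol, htake, List.count_append, List.filter_append, hcv, hfv, Nat.add_zero]
        simp [List.append_assoc]
      · obtain ⟨d', rfl⟩ : ∃ d', d = d' + 1 := ⟨d - 1, by omega⟩
        have hstep : stepS c (g, d' + 1) t =
            (setG (setG g (t + (d' + 1)) c (cellG g t c)) t c none, d' + 1) := by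
          simp [stepS, hv]
        rw [hstep]
        have hlen : mm - (t + 1) = (d' + 1) + w.length := by
          have := congrArg List.length hdrop
          simpa [length_colOf] using this
        have htd : t + (d' + 1) < mm := by omega
        have hrin : t + (d' + 1) < g.length := by omega
        have hcin : c < (g.getD (t + (d' + 1)) []).length := hrow _ htd
        set g1 := setG g (t + (d' + 1)) c (cellG g t c) with hg1
        have hrin2 : t < g1.length := by rw [hg1, len_setG]; omega
        have hcin2 : c < (g1.getD t []).length := by rw [hg1, rowlen_setG]; exact hrow t (by omega)
        set g' := setG g1 t c none with hg'
        have hshape' : sameShape g' g :=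
          sameShape_trans (sameShape_setG g1 t c none) (sameShape_setG g (t + (d' + 1)) c _)
        have hml' : mm ≤ g'.length := by rw [hshape'.1]; exact hml
        have hrow' : ∀ r, r < mm → c < (g'.getD r []).length := by
          intro r hr; rw [hshape'.2 r]; exact hrow r hr
        have hcol' : colOf g' c mm = ((colOf g c mm).set (t + (d' + 1)) (cellG g t c)).set t none := by
          rw [hg', colOf_setG g1 t c none mm hrin2 hcin2, hg1,
            colOf_setG g (t + (d' + 1)) c _ mm hrin hcin]
        have htake' : (colOf g' c mm).take t = (colOf g c mm).take t := by
          rw [hcol', List.take_set, List.take_set, set_oob, set_oob]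
          · rw [List.length_take, length_colOf]; omega
          · rw [List.length_set, List.length_take, length_colOf]; omega
        have hdrop'' : (colOf g' c mm).drop t =
            List.replicate (d' + 1) none ++ (cellG g t c :: w) := by
          rw [hcol', List.drop_set, List.drop_set]
          rw [if_neg (by omega), if_neg (by omega)]
          rw [hdropt, hdrop, hcell]
          have h1 : (cellG g t c :: (List.replicate (d' + 1) (none : Option Char) ++ w)).set
              (t + (d' + 1) - t) (cellG g t c) =
              cellG g t c :: ((List.replicate (d' + 1) (none : Option Char) ++ w).set d' (cellG g t c)) := by
            have e : t + (d' + 1) - t = d' + 1 := by omega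
            rw [e, List.set_cons_succ]
          rw [h1]
          have h2 : (List.replicate (d' + 1) (none : Option Char) ++ w).set d' (cellG g t c) =
              List.replicate d' (none : Option Char) ++ (cellG g t c :: w) := by
            rw [List.replicate_succ', List.append_assoc, List.set_append]
            rw [if_neg (by simp)]
            simp
          rw [h2]
          have h3 : t - t = 0 := by omega
          rw [h3, List.set_cons_zero]
          rw [List.replicate_succ]
          rfl
        have hw' : ∀ x ∈ cellG g t c :: w, x ≠ none := by
          intro x hx
          rcases List.mem_cons.1 hx with rfl | hx'
          · exact hv
          · exact hw x hx'
        obtain ⟨ha, hb, hc2, hcol⟩ := ih (d' + 1) g' (cellG g t c :: w) (by omega) hml' hrow' hdrop'' hw'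
        refine ⟨sameShape_trans ha hshape', ?_, ?_, ?_⟩
        · intro r c' hcc
          rw [hb r c' hcc, hg', cell_setG_none, hg1, cell_setG g _ c _ _ _ hrin hcin]
          rw [if_neg (show ¬ (r = t ∧ c' = c) from fun hh => hcc hh.2),
            if_neg (show ¬ (r = t + (d' + 1) ∧ c' = c) from fun hh => hcc hh.2)]
        · intro r hr
          rw [hc2 r hr, hg', cell_setG_none, hg1, cell_setG g _ c _ _ _ hrin hcin]
          rw [if_neg (show ¬ (r = t ∧ c = c) from fun hh => absurd hh.1 (by omega)),
            if_neg (show ¬ (r = t + (d' + 1) ∧ c = c) from fun hh => absurd hh.1 (by omega))]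
        · rw [hcol, htake', htake]
          have hcv : List.count (none : Option Char) [cellG g t c] = 0 := by
            rw [List.count_eq_zero]
            simp only [List.mem_singleton]
            intro hh; exact hv hh.symm
          have hfv : List.filter (fun v => decide (v ≠ none)) [cellG g t c] = [cellG g t c] := by
            simp [hv]
          rw [List.count_append, List.filter_append, hcv, hfv, Nat.add_zero]
          simp [List.append_assoc]

theorem count_none_add_filter (l : List (Option Char)) :
    l.count none + (l.filter (fun v => v ≠ none)).length = l.length := by
  induction l with
  | nil => rfl
  | cons x l ih =>
    by_cases hx : x = none
    · subst hx
      simp [List.count_cons, List.filter_cons] at ih ⊢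
      omega
    · simp [List.count_cons, List.filter_cons, hx] at ih ⊢
      omega

def stackOf (g : Grid) (c mm : Nat) : List (Option Char) :=
  List.replicate (mm - ((colOf g c mm).filter (fun v => v ≠ none)).length) none ++
    (colOf g c mm).filter (fun v => v ≠ none)

def colWrite (g : Grid) (c mm : Nat) : Grid :=
  (List.range mm).foldl (fun g2 r => setG g2 r c ((stackOf g c mm).getD r none)) g

-- A's slide = per-column rewrite with the packed column (proof-side view)
def gravG (m n : Int) (g : Grid) : Grid :=
  (List.range n.toNat).foldl (fun g c => colWrite g c m.toNat) g

theorem write_col (c : Nat) (stack : List (Option Char)) :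
    ∀ (L : List Nat) (g : Grid),
      (∀ x ∈ L, x < g.length ∧ c < (g.getD x []).length) →
      sameShape (L.foldl (fun g2 r => setG g2 r c (stack.getD r none)) g) g ∧
      ∀ r' c', cellG (L.foldl (fun g2 r => setG g2 r c (stack.getD r none)) g) r' c' =
        if c' = c ∧ r' ∈ L then stack.getD r' none else cellG g r' c' := by
  intro L
  induction L with
  | nil => intro g _; exact ⟨sameShape_refl g, by simp⟩
  | cons x L ih =>
    intro g hin
    have hx := hin x (List.mem_cons_self ..)
    have hsh := sameShape_setG g x c (stack.getD x none)
    have hin' : ∀ y ∈ L, y < (setG g x c (stack.getD x none)).length ∧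
        c < ((setG g x c (stack.getD x none)).getD y []).length := by
      intro y hy
      obtain ⟨h1, h2⟩ := hin y (List.mem_cons_of_mem _ hy)
      exact ⟨by rw [hsh.1]; exact h1, by rw [hsh.2 y]; exact h2⟩
    obtain ⟨iha, ihb⟩ := ih (setG g x c (stack.getD x none)) hin'
    rw [List.foldl_cons]
    refine ⟨sameShape_trans iha hsh, ?_⟩
    intro r' c'
    rw [ihb r' c', cell_setG g x c _ r' c' hx.1 hx.2]
    by_cases h1 : c' = c
    · by_cases h2 : r' ∈ L
      · simp [h1, h2]
      · by_cases h3 : r' = x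
        · simp [h1, h2, h3]
        · have hnm : ¬ (c' = c ∧ r' ∈ x :: L) := by
            rintro ⟨_, hh⟩
            rcases List.mem_cons.1 hh with rfl | hh' <;> [exact h3 rfl; exact h2 hh']
          simp [h1, h2, h3, hnm]
    · simp [h1]

theorem percol_eq (c mm : Nat) (g : Grid)
    (hml : mm ≤ g.length) (hrow : ∀ r, r < mm → c < (g.getD r []).length) :
    ((List.range mm).reverse.foldl (stepS c) (g, 0)).1 = colWrite g c mm ∧
    sameShape (colWrite g c mm) g := by
  have hcw : colWrite g c mm =
      (List.range mm).foldl (fun g2 r => setG g2 r c ((stackOf g c mm).getD r none)) g := rfl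
  have hdrop : (colOf g c mm).drop mm = List.replicate 0 none ++ [] := by
    rw [List.drop_eq_nil_of_le (by simp [length_colOf])]
    rfl
  obtain ⟨ha, hb, hc2, hcol⟩ :=
    slide_inv c mm mm 0 g [] (le_refl mm) hml hrow hdrop (by simp)
  have hwin : ∀ x ∈ List.range mm, x < g.length ∧ c < (g.getD x []).length := by
    intro x hx
    rw [List.mem_range] at hx
    exact ⟨by omega, hrow x hx⟩
  obtain ⟨hwa, hwb⟩ := write_col c (stackOf g c mm) (List.range mm) g hwin
  have hstack : stackOf g c mm =
      List.replicate ((colOf g c mm).count none + 0) none ++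
        (colOf g c mm).filter (fun v => v ≠ none) ++ [] := by
    unfold stackOf
    have hh := count_none_add_filter (colOf g c mm)
    rw [length_colOf] at hh
    rw [List.append_nil]
    congr 2
    omega
  have hslen : (stackOf g c mm).length = mm := by
    unfold stackOf
    rw [List.length_append, List.length_replicate]
    have hh := count_none_add_filter (colOf g c mm)
    rw [length_colOf] at hh
    omega
  have htakeall : (colOf g c mm).take mm = colOf g c mm := by
    apply List.take_of_length_le
    rw [length_colOf]
  rw [htakeall] at hcol
  constructor
  · apply grid_ext
    · refine sameShape_trans ha ?_
      rw [hcw]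
      exact ⟨hwa.1.symm, fun i => (hwa.2 i).symm⟩
    · intro r c'
      rw [hcw, hwb r c']
      by_cases h1 : c' = c
      · by_cases h2 : r ∈ List.range mm
        · have h2' := List.mem_range.1 h2
          rw [if_pos ⟨h1, h2⟩]
          have hg1 : cellG (((List.range mm).reverse.foldl (stepS c) (g, 0)).1) r c
              = (colOf (((List.range mm).reverse.foldl (stepS c) (g, 0)).1) c mm).getD r none := by
            rw [List.getD_eq_getElem _ _ (by rw [length_colOf]; exact h2'), getElem_colOf]
          rw [h1, hg1, hcol, ← hstack]
        · rw [if_neg (by rintro ⟨_, hh⟩; exact h2 hh)]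
          rw [h1]
          exact hc2 r (by simpa [List.mem_range, Nat.not_lt] using h2)
      · rw [if_neg (by rintro ⟨hh, _⟩; exact h1 hh)]
        exact hb r c' h1
  · rw [hcw]
    exact hwa

theorem slide_outer_eq (mm : Nat) :
    ∀ (L : List Nat) (g : Grid),
      mm ≤ g.length → (∀ r, r < mm → ∀ c ∈ L, c < (g.getD r []).length) →
      (L.foldl (fun g c => ((List.range mm).reverse.foldl (stepS c) (g, 0)).1) g =
        L.foldl (fun g c => colWrite g c mm) g) ∧
      sameShape (L.foldl (fun g c => colWrite g c mm) g) g := by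
  intro L
  induction L with
  | nil => intro g _ _; exact ⟨rfl, sameShape_refl g⟩
  | cons c L ih =>
    intro g hml hrow
    have hrowc : ∀ r, r < mm → c < (g.getD r []).length := by
      intro r hr; exact hrow r hr c (List.mem_cons_self ..)
    obtain ⟨hpc, hpcs⟩ := percol_eq c mm g hml hrowc
    have hml' : mm ≤ (colWrite g c mm).length := by rw [hpcs.1]; exact hml
    have hrow' : ∀ r, r < mm → ∀ c' ∈ L, c' < ((colWrite g c mm).getD r []).length := by
      intro r hr c' hc'
      rw [hpcs.2 r]
      exact hrow r hr c' (List.mem_cons_of_mem _ hc')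
    obtain ⟨ihe, ihs⟩ := ih (colWrite g c mm) hml' hrow'
    rw [List.foldl_cons, List.foldl_cons, hpc, ihe]
    exact ⟨rfl, sameShape_trans ihs hpcs⟩

theorem slideA_eq_gravG (m n : Int) (g : Grid) (hWF : WF m n g) :
    slideA m n g = gravG m n g := by
  rw [slideA_rfl]
  apply (slide_outer_eq m.toNat (List.range n.toNat) g hWF.1 ?_).1
  intro r hr c hc
  rw [List.mem_range] at hc
  have := hWF.2 r hr
  omega

theorem WF_of_sameShape {m n : Int} {g g' : Grid} (h : sameShape g' g) (hWF : WF m n g) :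
    WF m n g' := by
  refine ⟨by rw [h.1]; exact hWF.1, ?_⟩
  intro r hr
  rw [h.2 r]
  exact hWF.2 r hr

-- ---- generic list helpers ----

theorem list_eq_map_range {α : Type} (l : List α) (d : α) :
    (List.range l.length).map (fun i => l.getD i d) = l := by
  apply List.ext_getElem
  · simp
  · intro i h1 h2
    simp only [List.getElem_map, List.getElem_range]
    rw [List.getD_eq_getElem _ _ h2]

theorem sum_map_range_eq_finset (k : Nat) (f : Nat → Int) :
    ((List.range k).map f).sum = ∑ i ∈ Finset.range k, f i := by
  induction k with
  | zero => simp
  | succ k ih => rw [List.range_succ, List.map_append, List.sum_append,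
      Finset.sum_range_succ, ih]; simp

theorem count_indicator (l : List (Option Char)) :
    ((l.count (none : Option Char) : Nat) : Int) =
      ((List.range l.length).map (fun i => if l.getD i none = none then (1:Int) else 0)).sum := by
  induction l with
  | nil => simp
  | cons x t ih =>
    rw [List.length_cons, List.range_succ_eq_map, List.map_cons, List.map_map, List.sum_cons]
    have h2 : (List.map ((fun i => if (x :: t).getD i none = none then (1:Int) else 0) ∘ Nat.succ)
        (List.range t.length)) = (List.range t.length).map (fun i => if t.getD i none = none then (1:Int) else 0) := by
      apply List.map_congr_left
      intro i _
      rfl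
    rw [h2, ← ih, List.count_cons]
    by_cases hx : x = none
    · simp [hx]; omega
    · have : ¬ ((x :: t).getD 0 none = none) := by simpa using hx
      simp only [List.getD_cons_zero]
      rw [if_neg hx]
      simp only [beq_iff_eq]
      rw [if_neg hx]
      push_cast
      omega

-- ---- packed columns: the B representation ----

def packCol (M : Nat) (col : List Char) : List (Option Char) :=
  List.replicate (M - col.length) none ++ (col.reverse.map some)

theorem length_packCol (M : Nat) (col : List Char) (h : col.length ≤ M) :
    (packCol M col).length = M := by
  simp [packCol]
  omega

theorem getD_packCol (M : Nat) (col : List Char) (h : col.length ≤ M) (r : Nat) (hr : r < M) :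
    (packCol M col).getD r none =
      if r < M - col.length then none else some (col.getD (M - 1 - r) ' ') := by
  unfold packCol
  by_cases h1 : r < M - col.length
  · rw [if_pos h1, List.getD_append _ _ _ _ (by simpa using h1)]
    simp
  · rw [if_neg h1]
    rw [List.getD_append_right _ _ _ _ (by simp; omega)]
    simp only [List.length_replicate]
    have hidx : r - (M - col.length) < (col.reverse.map some).length := by simp; omega
    rw [List.getD_eq_getElem _ _ hidx, List.getElem_map, List.getElem_reverse]
    have e : col.length - 1 - (r - (M - col.length)) = M - 1 - r := by omega
    simp only [e]
    rw [List.getD_eq_getElem _ _ (show M - 1 - r < col.length by omega)]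

-- the loop invariant tying A's grid to B's column stacks
def InvGB (m n : Int) (g : Grid) (cols : List (List Char)) : Prop :=
  WF m n g ∧
  cols.length = n.toNat ∧
  (∀ c, c < n.toNat → (cols.getD c []).length ≤ m.toNat ∧
      colOf g c m.toNat = packCol m.toNat (cols.getD c [])) ∧
  (∀ r, r < m.toNat → ∀ c, n.toNat ≤ c → c < (g.getD r []).length → cellG g r c ≠ none)

theorem cellPack {m n : Int} {g : Grid} {cols : List (List Char)} (hI : InvGB m n g cols)
    {c r : Nat} (hc : c < n.toNat) (hr : r < m.toNat) :
    cellG g r c = if r < m.toNat - (cols.getD c []).length then none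
      else some ((cols.getD c []).getD (m.toNat - 1 - r) ' ') := by
  obtain ⟨hL, hcol⟩ := hI.2.2.1 c hc
  have h1 : cellG g r c = (colOf g c m.toNat).getD r none := by
    rw [List.getD_eq_getElem _ _ (by rw [length_colOf]; exact hr), getElem_colOf]
  rw [h1, hcol, getD_packCol m.toNat _ hL r hr]

-- the 2x2-block condition on the stacks (exactly B's inner test with its bounds)
def blockS (cols : List (List Char)) (c h : Nat) : Prop :=
  h + 1 < (cols.getD c []).length ∧ h + 1 < (cols.getD (c+1) []).length ∧
  (cols.getD c []).getD h ' ' = (cols.getD c []).getD (h+1) ' ' ∧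
  (cols.getD c []).getD (h+1) ' ' = (cols.getD (c+1) []).getD h ' ' ∧
  (cols.getD (c+1) []).getD h ' ' = (cols.getD (c+1) []).getD (h+1) ' '

theorem condB_iff_blockS {m n : Int} {g : Grid} {cols : List (List Char)}
    (hI : InvGB m n g cols) (h2m : 2 ≤ m) {i j : Nat}
    (hi : i < m.toNat - 1) (hj : j + 1 < n.toNat) :
    condB g i j = true ↔ blockS cols j (m.toNat - 2 - i) := by
  have hM2 : 2 ≤ m.toNat := by omega
  obtain ⟨hL1, -⟩ := hI.2.2.1 j (by omega)
  obtain ⟨hL2, -⟩ := hI.2.2.1 (j+1) hj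
  have e1 := cellPack hI (show j < n.toNat by omega) (show i < m.toNat by omega)
  have e2 := cellPack hI hj (show i < m.toNat by omega)
  have e3 := cellPack hI (show j < n.toNat by omega) (show i+1 < m.toNat by omega)
  have e4 := cellPack hI hj (show i+1 < m.toNat by omega)
  have hA : m.toNat - 1 - i = m.toNat - 2 - i + 1 := by omega
  have hB : m.toNat - 1 - (i+1) = m.toNat - 2 - i := by omega
  rw [hA] at e1 e2
  rw [hB] at e3 e4
  rw [condB_iff, e1, e2, e3, e4]
  unfold blockS
  constructor
  · rintro ⟨hne, q2, q3, q4⟩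
    have nA1 : ¬ i < m.toNat - (cols.getD j []).length := by
      intro hA1; rw [if_pos hA1] at hne; exact hne rfl
    rw [if_neg nA1] at q2 q3 q4
    have nA2 : ¬ i < m.toNat - (cols.getD (j+1) []).length := by
      intro hA2; rw [if_pos hA2] at q2; exact absurd q2 (by simp)
    rw [if_neg nA2] at q2
    have nA3 : ¬ i + 1 < m.toNat - (cols.getD j []).length := by omega
    rw [if_neg nA3] at q3
    have nA4 : ¬ i + 1 < m.toNat - (cols.getD (j+1) []).length := by omega
    rw [if_neg nA4] at q4
    have v2 := Option.some.inj q2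
    have v3 := Option.some.inj q3
    have v4 := Option.some.inj q4
    exact ⟨by omega, by omega, v3, v4.symm, v4.trans v2.symm⟩
  · rintro ⟨b1, b2, q1, q2, q3⟩
    have nA1 : ¬ i < m.toNat - (cols.getD j []).length := by omega
    have nA2 : ¬ i < m.toNat - (cols.getD (j+1) []).length := by omega
    have nA3 : ¬ i + 1 < m.toNat - (cols.getD j []).length := by omega
    have nA4 : ¬ i + 1 < m.toNat - (cols.getD (j+1) []).length := by omega
    rw [if_neg nA1, if_neg nA2, if_neg nA3, if_neg nA4]
    exact ⟨by simp, congrArg some (q3.symm.trans q2.symm), congrArg some q1,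
      congrArg some q2.symm⟩

theorem mem_anchorsL_iff {m n : Int} {g : Grid} {cols : List (List Char)}
    (hI : InvGB m n g cols) (h2m : 2 ≤ m) (h2n : 2 ≤ n) (p : Nat × Nat) :
    p ∈ anchorsL m n g ↔ p.1 < m.toNat - 1 ∧ p.2 + 1 < n.toNat ∧
      blockS cols p.2 (m.toNat - 2 - p.1) := by
  unfold anchorsL
  rw [List.mem_filter, mem_idxsL]
  have hm1 : (m-1).toNat = m.toNat - 1 := by omega
  have hn1 : (n-1).toNat = n.toNat - 1 := by omega
  constructor
  · rintro ⟨⟨hi, hj⟩, hcond⟩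
    have hi' : p.1 < m.toNat - 1 := by omega
    have hj' : p.2 + 1 < n.toNat := by omega
    exact ⟨hi', hj', (condB_iff_blockS hI h2m hi' hj').1 (by simpa using hcond)⟩
  · rintro ⟨hi, hj, hb⟩
    exact ⟨⟨by omega, by omega⟩, by simpa using (condB_iff_blockS hI h2m hi hj).2 hb⟩

-- ---- characterisation of B's marks ----

-- B's inner mark step, named (definitionally equal to the lambda in marksB)
def stepM (a b : List Char) (c : Nat) (marks : List (PySem.Set Int)) (h : Nat) :
    List (PySem.Set Int) :=
  if a.getD h ' ' = a.getD (h+1) ' ' ∧ a.getD (h+1) ' ' = b.getD h ' ' ∧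
      b.getD h ' ' = b.getD (h+1) ' ' then
    let marks := marks.set c (PySem.Set.update (marks.getD c PySem.Set.empty) [(h : Int), ((h : Int)+1)])
    marks.set (c+1) (PySem.Set.update (marks.getD (c+1) PySem.Set.empty) [(h : Int), ((h : Int)+1)])
  else marks

def PM (a b : List Char) (h : Nat) : Prop :=
  a.getD h ' ' = a.getD (h+1) ' ' ∧ a.getD (h+1) ' ' = b.getD h ' ' ∧
    b.getD h ' ' = b.getD (h+1) ' '

theorem marksB_rfl (n : Int) (cols : List (List Char)) :
    marksB n cols = (List.range (n-1).toNat).foldl (fun marks c =>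
      (List.range (min (cols.getD c []).length (cols.getD (c+1) []).length - 1)).foldl
        (stepM (cols.getD c []) (cols.getD (c+1) []) c) marks)
      (List.replicate n.toNat PySem.Set.empty) := rfl

theorem marks_inner_spec (a b : List Char) (c : Nat) :
    ∀ (hs : List Nat) (marks : List (PySem.Set Int)), c + 1 < marks.length →
      (hs.foldl (stepM a b c) marks).length = marks.length ∧
      ((∀ k, (marks.getD k PySem.Set.empty).Nodup) →
        ∀ k, ((hs.foldl (stepM a b c) marks).getD k PySem.Set.empty).Nodup) ∧
      (∀ k (x : Int), x ∈ (hs.foldl (stepM a b c) marks).getD k PySem.Set.empty ↔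
         x ∈ marks.getD k PySem.Set.empty ∨
           ((k = c ∨ k = c+1) ∧ ∃ h ∈ hs, PM a b h ∧ (x = (h:Int) ∨ x = (h:Int)+1))) := by
  intro hs
  induction hs with
  | nil =>
    intro marks _
    refine ⟨rfl, fun hnd => hnd, ?_⟩
    intro k x
    simp
  | cons h hs ih =>
    intro marks hclen
    by_cases hp : PM a b h
    · have hgd1 : (marks.set c (PySem.Set.update (marks.getD c PySem.Set.empty)
          [(h : Int), ((h : Int)+1)])).getD (c+1) PySem.Set.empty = marks.getD (c+1) PySem.Set.empty := by
        rw [getD_set']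
        rw [if_neg (by omega)]
      have hp' := hp
      unfold PM at hp'
      have hstep : stepM a b c marks h =
          (marks.set c (PySem.Set.update (marks.getD c PySem.Set.empty) [(h : Int), ((h : Int)+1)])).set
            (c+1) (PySem.Set.update (marks.getD (c+1) PySem.Set.empty) [(h : Int), ((h : Int)+1)]) := by
        unfold stepM
        rw [if_pos hp']
        show (marks.set c (PySem.Set.update (marks.getD c PySem.Set.empty) [(h : Int), ((h : Int)+1)])).set
            (c+1) (PySem.Set.update ((marks.set c (PySem.Set.update (marks.getD c PySem.Set.empty)
              [(h : Int), ((h : Int)+1)])).getD (c+1) PySem.Set.empty) [(h : Int), ((h : Int)+1)]) = _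
        rw [hgd1]
      set S1 := PySem.Set.update (marks.getD c PySem.Set.empty) [(h : Int), ((h : Int)+1)] with hS1
      set S2 := PySem.Set.update (marks.getD (c+1) PySem.Set.empty) [(h : Int), ((h : Int)+1)] with hS2
      set M2 := (marks.set c S1).set (c+1) S2 with hM2
      have hlen2 : M2.length = marks.length := by simp [hM2]
      have hgd : ∀ k, M2.getD k PySem.Set.empty =
          if k = c + 1 then S2 else if k = c then S1 else marks.getD k PySem.Set.empty := by
        intro k
        rw [hM2, getD_set', getD_set']
        by_cases h1 : k = c + 1
        · rw [if_pos ⟨h1, by simp; omega⟩, if_pos h1]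
        · rw [if_neg (fun hh => h1 hh.1), if_neg h1]
          by_cases h2 : k = c
          · rw [if_pos ⟨h2, by omega⟩, if_pos h2]
          · rw [if_neg (fun hh => h2 hh.1), if_neg h2]
      obtain ⟨ihl, ihn, ihm⟩ := ih M2 (by omega)
      rw [List.foldl_cons, hstep]
      refine ⟨by rw [ihl, hlen2], ?_, ?_⟩
      · intro hnd k
        apply ihn
        intro k'
        rw [hgd k']
        by_cases h1 : k' = c + 1
        · rw [if_pos h1, hS2]; exact PySem.Set.nodup_update _ _ (hnd (c+1))
        · rw [if_neg h1]
          by_cases h2 : k' = c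
          · rw [if_pos h2, hS1]; exact PySem.Set.nodup_update _ _ (hnd c)
          · rw [if_neg h2]; exact hnd k'
      · intro k x
        rw [ihm k x, hgd k]
        have hmm : x ∈ (if k = c + 1 then S2 else if k = c then S1 else marks.getD k PySem.Set.empty) ↔
            x ∈ marks.getD k PySem.Set.empty ∨
              ((k = c ∨ k = c+1) ∧ (x = (h:Int) ∨ x = (h:Int)+1)) := by
          by_cases h1 : k = c + 1
          · rw [if_pos h1, hS2, PySem.Set.mem_update]
            subst h1
            simp only [List.mem_cons, List.not_mem_nil, or_false]
            tauto
          · rw [if_neg h1]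
            by_cases h2 : k = c
            · rw [if_pos h2, hS1, PySem.Set.mem_update]
              subst h2
              simp only [List.mem_cons, List.not_mem_nil, or_false]
              tauto
            · rw [if_neg h2]
              constructor
              · intro hx; exact Or.inl hx
              · rintro (hx | ⟨hk, -⟩)
                · exact hx
                · rcases hk with rfl | rfl
                  · exact absurd rfl h2
                  · exact absurd rfl h1
        rw [hmm]
        simp only [List.mem_cons]
        constructor
        · rintro ((hx | ⟨hk, hx⟩) | ⟨hk, h', hh', hpm, hx⟩)
          · exact Or.inl hx
          · exact Or.inr ⟨hk, h, Or.inl rfl, hp, hx⟩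
          · exact Or.inr ⟨hk, h', Or.inr hh', hpm, hx⟩
        · rintro (hx | ⟨hk, h', hh', hpm, hx⟩)
          · exact Or.inl (Or.inl hx)
          · rcases hh' with rfl | hh'
            · exact Or.inl (Or.inr ⟨hk, hx⟩)
            · exact Or.inr ⟨hk, h', hh', hpm, hx⟩
    · have hp' : ¬ (a.getD h ' ' = a.getD (h+1) ' ' ∧ a.getD (h+1) ' ' = b.getD h ' ' ∧
          b.getD h ' ' = b.getD (h+1) ' ') := fun hh => hp hh
      have hstep : stepM a b c marks h = marks := by
        unfold stepM
        rw [if_neg hp']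
      rw [List.foldl_cons, hstep]
      obtain ⟨ihl, ihn, ihm⟩ := ih marks hclen
      refine ⟨ihl, ihn, ?_⟩
      intro k x
      rw [ihm k x]
      simp only [List.mem_cons]
      constructor
      · rintro (hx | ⟨hk, h', hh', hpm, hx⟩)
        · exact Or.inl hx
        · exact Or.inr ⟨hk, h', Or.inr hh', hpm, hx⟩
      · rintro (hx | ⟨hk, h', hh', hpm, hx⟩)
        · exact Or.inl hx
        · rcases hh' with rfl | hh'
          · exact absurd hpm hp
          · exact Or.inr ⟨hk, h', hh', hpm, hx⟩

theorem marks_outer_spec (n : Int) (cols : List (List Char)) :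
    ∀ (cs : List Nat) (marks : List (PySem.Set Int)),
      marks.length = n.toNat → (∀ c ∈ cs, c + 1 < n.toNat) →
      ((cs.foldl (fun marks c =>
        (List.range (min (cols.getD c []).length (cols.getD (c+1) []).length - 1)).foldl
          (stepM (cols.getD c []) (cols.getD (c+1) []) c) marks) marks).length = n.toNat) ∧
      ((∀ k, (marks.getD k PySem.Set.empty).Nodup) →
        ∀ k, (((cs.foldl (fun marks c =>
          (List.range (min (cols.getD c []).length (cols.getD (c+1) []).length - 1)).foldl
            (stepM (cols.getD c []) (cols.getD (c+1) []) c) marks) marks)).getD k PySem.Set.empty).Nodup) ∧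
      (∀ k (x : Int), x ∈ ((cs.foldl (fun marks c =>
          (List.range (min (cols.getD c []).length (cols.getD (c+1) []).length - 1)).foldl
            (stepM (cols.getD c []) (cols.getD (c+1) []) c) marks) marks)).getD k PySem.Set.empty ↔
         x ∈ marks.getD k PySem.Set.empty ∨
           ∃ c' ∈ cs, ∃ h', blockS cols c' h' ∧ (k = c' ∨ k = c'+1) ∧
             (x = (h':Int) ∨ x = (h':Int)+1)) := by
  intro cs
  induction cs with
  | nil =>
    intro marks hlen _
    refine ⟨hlen, fun hnd => hnd, ?_⟩
    intro k x
    simp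
  | cons c cs ih =>
    intro marks hlen hcs
    have hc : c + 1 < n.toNat := hcs c (List.mem_cons_self ..)
    obtain ⟨inl, inn, inm⟩ := marks_inner_spec (cols.getD c []) (cols.getD (c+1) []) c
      (List.range (min (cols.getD c []).length (cols.getD (c+1) []).length - 1)) marks (by omega)
    obtain ⟨ol, on, om⟩ := ih _ (by rw [inl]; exact hlen) (fun c' hc' => hcs c' (List.mem_cons_of_mem _ hc'))
    rw [List.foldl_cons]
    refine ⟨ol, ?_, ?_⟩
    · intro hnd
      exact on (inn hnd)
    · intro k x
      rw [om k x, inm k x]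
      have hbr : ∀ h : Nat, (h ∈ List.range (min (cols.getD c []).length (cols.getD (c+1) []).length - 1) ∧
          PM (cols.getD c []) (cols.getD (c+1) []) h) ↔ blockS cols c h := by
        intro h
        rw [List.mem_range]
        unfold PM blockS
        constructor
        · rintro ⟨hh, p1, p2, p3⟩
          exact ⟨by omega, by omega, p1, p2, p3⟩
        · rintro ⟨b1, b2, p1, p2, p3⟩
          exact ⟨by omega, p1, p2, p3⟩
      constructor
      · rintro ((hx | ⟨hk, h', hh', hpm, hx⟩) | ⟨c', hc', h', hb, hk, hx⟩)
        · exact Or.inl hx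
        · exact Or.inr ⟨c, List.mem_cons_self .., h', (hbr h').1 ⟨hh', hpm⟩, hk, hx⟩
        · exact Or.inr ⟨c', List.mem_cons_of_mem _ hc', h', hb, hk, hx⟩
      · rintro (hx | ⟨c', hc', h', hb, hk, hx⟩)
        · exact Or.inl (Or.inl hx)
        · rcases List.mem_cons.1 hc' with rfl | hc''
          · exact Or.inl (Or.inr ⟨hk, h', ((hbr h').2 hb).1, ((hbr h').2 hb).2, hx⟩)
          · exact Or.inr ⟨c', hc'', h', hb, hk, hx⟩

theorem getD_replicate_empty (N k : Nat) :
    (List.replicate N (PySem.Set.empty : PySem.Set Int)).getD k PySem.Set.empty = PySem.Set.empty := by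
  by_cases h : k < N
  · exact List.getD_replicate _ h
  · exact List.getD_eq_default _ _ (by simp; omega)

theorem marksB_spec (n : Int) (cols : List (List Char)) :
    (marksB n cols).length = n.toNat ∧
    (∀ c, ((marksB n cols).getD c PySem.Set.empty).Nodup) ∧
    (∀ c (x : Int), x ∈ (marksB n cols).getD c PySem.Set.empty ↔
      ∃ c' h', c' + 1 < n.toNat ∧ blockS cols c' h' ∧ (c = c' ∨ c = c' + 1) ∧
        (x = (h' : Int) ∨ x = (h' : Int) + 1)) := by
  rw [marksB_rfl]
  obtain ⟨ol, on, om⟩ := marks_outer_spec n cols (List.range (n-1).toNat)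
    (List.replicate n.toNat PySem.Set.empty) (by simp)
    (fun c hc => by rw [List.mem_range] at hc; omega)
  refine ⟨ol, ?_, ?_⟩
  · exact fun c => on (fun k => by rw [getD_replicate_empty]; exact List.nodup_nil) c
  · intro c x
    rw [om c x, getD_replicate_empty]
    simp only [PySem.Set.empty, List.not_mem_nil, false_or, List.mem_range]
    constructor
    · rintro ⟨c', hc', h', hb, hk, hx⟩
      exact ⟨c', h', by omega, hb, hk, hx⟩
    · rintro ⟨c', h', hc', hb, hk, hx⟩
      exact ⟨c', by omega, h', hb, hk, hx⟩

-- cleared grid cells = marked stack cells (main case)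
theorem mem_cellsL_iff_marked {m n : Int} {g : Grid} {cols : List (List Char)}
    (hI : InvGB m n g cols) (h2m : 2 ≤ m) (h2n : 2 ≤ n) (r c : Nat) :
    (r, c) ∈ cellsL m n g ↔
      r < m.toNat ∧ ((m.toNat - 1 - r : Nat) : Int) ∈ (marksB n cols).getD c PySem.Set.empty := by
  obtain ⟨hlen, hnd, hmem⟩ := marksB_spec n cols
  unfold cellsL
  rw [List.mem_flatMap]
  constructor
  · rintro ⟨p, hp, hx⟩
    rw [mem_anchorsL_iff hI h2m h2n] at hp
    obtain ⟨hi, hj, hb⟩ := hp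
    obtain ⟨hLp, -⟩ := hI.2.2.1 p.2 (by omega)
    have hbb := hb.1
    simp only [fourA, List.mem_cons, List.not_mem_nil, or_false] at hx
    rcases hx with hx | hx | hx | hx <;> rw [Prod.ext_iff] at hx <;> obtain ⟨hr, hc⟩ := hx
    · refine ⟨by omega, (hmem c _).2 ⟨p.2, m.toNat - 2 - p.1, hj, hb, Or.inl hc, Or.inr (by omega)⟩⟩
    · refine ⟨by omega, (hmem c _).2 ⟨p.2, m.toNat - 2 - p.1, hj, hb, Or.inl hc, Or.inl (by omega)⟩⟩
    · refine ⟨by omega, (hmem c _).2 ⟨p.2, m.toNat - 2 - p.1, hj, hb, Or.inr hc, Or.inr (by omega)⟩⟩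
    · refine ⟨by omega, (hmem c _).2 ⟨p.2, m.toNat - 2 - p.1, hj, hb, Or.inr hc, Or.inl (by omega)⟩⟩
  · rintro ⟨hr, hx⟩
    obtain ⟨c', h', hc', hb, hk, hxe⟩ := (hmem c _).1 hx
    obtain ⟨hL1, -⟩ := hI.2.2.1 c' (by omega)
    obtain ⟨hL2, -⟩ := hI.2.2.1 (c'+1) hc'
    have hb1 := hb.1
    have hb2 := hb.2.1
    have hh'M : h' + 1 < m.toNat := by omega
    refine ⟨(m.toNat - 2 - h', c'), ?_, ?_⟩
    · rw [mem_anchorsL_iff hI h2m h2n]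
      refine ⟨by omega, hc', ?_⟩
      have e : m.toNat - 2 - (m.toNat - 2 - h') = h' := by omega
      rw [e]
      exact hb
    · have hx' : m.toNat - 1 - r = h' ∨ m.toNat - 1 - r = h' + 1 := by
        rcases hxe with he | he
        · left; omega
        · right; omega
      simp only [fourA, List.mem_cons, List.not_mem_nil, or_false]
      rcases hk with rfl | rfl <;> rcases hx' with he | he
      · exact Or.inr (Or.inl (by rw [Prod.ext_iff]; exact ⟨by omega, rfl⟩))
      · exact Or.inl (by rw [Prod.ext_iff]; exact ⟨by omega, rfl⟩)
      · exact Or.inr (Or.inr (Or.inr (by rw [Prod.ext_iff]; exact ⟨by omega, rfl⟩)))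
      · exact Or.inr (Or.inr (Or.inl (by rw [Prod.ext_iff]; exact ⟨by omega, rfl⟩)))

-- ---- cellwise description of the gravity rewrite ----

theorem length_stackOf (g : Grid) (c mm : Nat) : (stackOf g c mm).length = mm := by
  unfold stackOf
  rw [List.length_append, List.length_replicate]
  have hh := count_none_add_filter (colOf g c mm)
  rw [length_colOf] at hh
  omega

theorem stack_congr {g1 g2 : Grid} (c mm : Nat) (h : colOf g1 c mm = colOf g2 c mm) :
    stackOf g1 c mm = stackOf g2 c mm := by
  unfold stackOf
  rw [h]

theorem cell_colWrite (g : Grid) (c0 mm : Nat) (hml : mm ≤ g.length)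
    (hrow : ∀ r, r < mm → c0 < (g.getD r []).length) (r c : Nat) :
    cellG (colWrite g c0 mm) r c =
      if c = c0 ∧ r < mm then (stackOf g c0 mm).getD r none else cellG g r c := by
  obtain ⟨-, hwb⟩ := write_col c0 (stackOf g c0 mm) (List.range mm) g
    (fun x hx => ⟨by have := List.mem_range.1 hx; omega, hrow x (List.mem_range.1 hx)⟩)
  have he : colWrite g c0 mm =
      (List.range mm).foldl (fun g2 r => setG g2 r c0 ((stackOf g c0 mm).getD r none)) g := rfl
  rw [he, hwb]
  simp [List.mem_range]

theorem cell_gravFold (mm : Nat) :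
    ∀ (L : List Nat) (g : Grid), L.Nodup →
      mm ≤ g.length → (∀ r, r < mm → ∀ c ∈ L, c < (g.getD r []).length) →
      (sameShape (L.foldl (fun g c => colWrite g c mm) g) g) ∧
      (∀ r c, cellG (L.foldl (fun g c => colWrite g c mm) g) r c =
        if c ∈ L ∧ r < mm then (stackOf g c mm).getD r none else cellG g r c) := by
  intro L
  induction L with
  | nil => intro g _ _ _; exact ⟨sameShape_refl g, by simp⟩
  | cons c0 L ih =>
    intro g hnd hml hrow
    have hrow0 : ∀ r, r < mm → c0 < (g.getD r []).length :=
      fun r hr => hrow r hr c0 (List.mem_cons_self ..)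
    have hsh : sameShape (colWrite g c0 mm) g := (percol_eq c0 mm g hml hrow0).2
    have hml' : mm ≤ (colWrite g c0 mm).length := by rw [hsh.1]; exact hml
    have hrow' : ∀ r, r < mm → ∀ c ∈ L, c < ((colWrite g c0 mm).getD r []).length := by
      intro r hr c hc; rw [hsh.2 r]; exact hrow r hr c (List.mem_cons_of_mem _ hc)
    obtain ⟨ihs, ihc⟩ := ih (colWrite g c0 mm) (List.Nodup.of_cons hnd) hml' hrow'
    rw [List.foldl_cons]
    refine ⟨sameShape_trans ihs hsh, ?_⟩
    intro r c
    rw [ihc r c]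
    have hcell0 := cell_colWrite g c0 mm hml hrow0
    by_cases hcL : c ∈ L
    · have hcc0 : c ≠ c0 := by
        rw [List.nodup_cons] at hnd
        intro he; exact hnd.1 (he ▸ hcL)
      have hcol : colOf (colWrite g c0 mm) c mm = colOf g c mm := by
        apply List.ext_getElem (by rw [length_colOf, length_colOf])
        intro t h1 h2
        rw [getElem_colOf, getElem_colOf, hcell0 t c, if_neg (fun hh => hcc0 hh.1)]
      by_cases hrm : r < mm
      · rw [if_pos ⟨hcL, hrm⟩, if_pos ⟨List.mem_cons_of_mem _ hcL, hrm⟩, stack_congr c mm hcol]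
      · rw [if_neg (fun hh => hrm hh.2), if_neg (fun hh => hrm hh.2), hcell0 r c,
          if_neg (fun hh => hrm hh.2)]
    · rw [if_neg (fun hh => hcL hh.1), hcell0 r c]
      by_cases hc0 : c = c0
      · subst hc0
        by_cases hrm : r < mm
        · rw [if_pos ⟨rfl, hrm⟩, if_pos ⟨List.mem_cons_self .., hrm⟩]
        · rw [if_neg (fun hh => hrm hh.2), if_neg (fun hh => hrm hh.2)]
      · rw [if_neg (fun hh => hc0 hh.1),
          if_neg (fun hh => (List.mem_cons.1 hh.1).elim (fun e => hc0 e) (fun e => hcL e))]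

theorem gravG_cells (m n : Int) (g : Grid) (hWF : WF m n g) :
    sameShape (gravG m n g) g ∧
    ∀ r c, cellG (gravG m n g) r c =
      if c < n.toNat ∧ r < m.toNat then (stackOf g c m.toNat).getD r none else cellG g r c := by
  unfold gravG
  obtain ⟨hs, hc⟩ := cell_gravFold m.toNat (List.range n.toNat) g List.nodup_range hWF.1
      (fun r hr c hcm => by have := hWF.2 r hr; have := List.mem_range.1 hcm; omega)
  refine ⟨hs, ?_⟩
  intro r c
  rw [hc r c]
  simp [List.mem_range]

theorem colOf_gravG (m n : Int) (g : Grid) (hWF : WF m n g) (c : Nat) (hc : c < n.toNat) :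
    colOf (gravG m n g) c m.toNat = stackOf g c m.toNat := by
  obtain ⟨-, hcell⟩ := gravG_cells m n g hWF
  apply List.ext_getElem (by rw [length_colOf, length_stackOf])
  intro r h1 h2
  rw [length_colOf] at h1
  rw [getElem_colOf, hcell, if_pos ⟨hc, h1⟩, List.getD_eq_getElem _ _ h2]


-- B's fresh column as a range-filter-map (Nat indices)
theorem getD_newColsB (cols : List (List Char)) (marks : List (PySem.Set Int)) (c : Nat)
    (hc : c < cols.length) (hlen : marks.length = cols.length) :
    (newColsB cols marks).getD c [] =
      ((PySem.List.enumerate (cols.getD c []) 0).filter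
        (fun hv => ¬ PySem.Set.contains (marks.getD c PySem.Set.empty) hv.1)).map (fun hv => hv.2) := by
  unfold newColsB
  have hlz : c < (cols.zip marks).length := by rw [List.length_zip]; omega
  rw [List.getD_eq_getElem _ _ (by rw [List.length_map]; exact hlz), List.getElem_map,
    List.getElem_zip, List.getD_eq_getElem cols _ hc, List.getD_eq_getElem marks _ (by omega)]

theorem newcol_eq (col : List Char) (S : PySem.Set Int) :
    ((PySem.List.enumerate col 0).filter (fun hv => ¬ PySem.Set.contains S hv.1)).map (fun hv => hv.2)
    = ((List.range col.length).filter (fun h : Nat => ¬ ((h : Int) ∈ S))).map (fun h => col.getD h ' ') := by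
  rw [show PySem.List.enumerate col 0 = PySem.List.enumerate col from rfl]
  rw [PySem.List.enumerate_eq_map_pyRange col ' ']
  rw [show PySem.List.len col = ((col.length : Nat) : Int) by simp [PySem.List.len]]
  rw [PySem.List.pyRange_zero_natCast, List.map_map, List.filter_map, List.map_map]
  have hp : ∀ a ∈ List.range col.length,
      ((fun hv : Int × Char => decide (¬ PySem.Set.contains S hv.1 = true)) ∘
        ((fun j : Int => (j, PySem.List.pyGetD col j ' ')) ∘ (fun k : Nat => (k : Int)))) a
      = decide (¬ ((a : Int) ∈ S)) := by
    intro a _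
    simp only [Function.comp]
    rw [decide_eq_decide]
    rw [PySem.Set.contains_iff]
  rw [List.filter_congr hp]
  apply List.map_congr_left
  intro a _
  simp only [Function.comp]
  rw [PySem.List.pyGetD_natCast]

-- every marked height of column c is a height of that column
theorem marks_mem_bound {m n : Int} {g : Grid} {cols : List (List Char)}
    (hI : InvGB m n g cols) (c : Nat) :
    ∀ x ∈ (marksB n cols).getD c PySem.Set.empty,
      ∃ k : Nat, x = (k : Int) ∧ k < (cols.getD c []).length := by
  obtain ⟨-, -, hmem⟩ := marksB_spec n cols
  intro x hx
  obtain ⟨c', h', hc', hb, hk, hxe⟩ := (hmem c x).1 hx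
  have hb1 := hb.1
  have hb2 := hb.2.1
  rcases hk with rfl | rfl <;> rcases hxe with rfl | rfl
  · exact ⟨h', rfl, by omega⟩
  · exact ⟨h' + 1, by push_cast; ring, by omega⟩
  · exact ⟨h', rfl, by omega⟩
  · exact ⟨h' + 1, by push_cast; ring, by omega⟩

theorem filter_mem_length (L : Nat) (S : PySem.Set Int) (hnd : S.Nodup)
    (hbound : ∀ x ∈ S, ∃ k : Nat, x = (k : Int) ∧ k < L) :
    ((List.range L).filter (fun h : Nat => ((h : Int) ∈ S))).length = S.length := by
  have hTn : (((List.range L).map (fun h : Nat => (h : Int))).filter (fun x => x ∈ S)).Nodup :=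
    (List.nodup_range.map (fun a b h => by omega)).filter _
  have hmemT : ∀ x : Int,
      x ∈ ((List.range L).map (fun h : Nat => (h : Int))).filter (fun x => x ∈ S) ↔ x ∈ S := by
    intro x
    rw [List.mem_filter, List.mem_map]
    constructor
    · rintro ⟨-, hx⟩; exact of_decide_eq_true hx
    · intro hx
      obtain ⟨k, rfl, hk⟩ := hbound x hx
      exact ⟨⟨k, List.mem_range.2 hk, rfl⟩, decide_eq_true hx⟩
  have hperm := (List.perm_ext_iff_of_nodup hTn hnd).2 hmemT
  have hlenT := hperm.length_eq
  rw [← hlenT, List.filter_map, List.length_map]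
  congr 1

theorem newcol_length (L : Nat) (S : PySem.Set Int) (hnd : S.Nodup)
    (hbound : ∀ x ∈ S, ∃ k : Nat, x = (k : Int) ∧ k < L) :
    ((List.range L).filter (fun h : Nat => ¬ ((h : Int) ∈ S))).length = L - S.length := by
  have h1 := List.length_eq_length_filter_add (l := List.range L) (fun h : Nat => decide ((h : Int) ∈ S))
  rw [List.length_range, filter_mem_length L S hnd hbound] at h1
  have h2 : (List.range L).filter (fun h : Nat => !(decide ((h : Int) ∈ S)))
      = (List.range L).filter (fun h : Nat => ¬ ((h : Int) ∈ S)) := by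
    apply List.filter_congr
    intro a _
    simp [decide_not]
  rw [h2] at h1
  omega

-- column c of the grid after A's zeroing, in stack terms
theorem colOf_zeroG_eq {m n : Int} {g : Grid} {cols : List (List Char)}
    (hI : InvGB m n g cols) (h2m : 2 ≤ m) (h2n : 2 ≤ n) (c : Nat) (hc : c < n.toNat) :
    colOf (zeroG m n g) c m.toNat =
      List.replicate (m.toNat - (cols.getD c []).length) none ++
        ((List.range (cols.getD c []).length).reverse.map
          (fun h => if ((h : Nat) : Int) ∈ (marksB n cols).getD c PySem.Set.empty then none
                    else some ((cols.getD c []).getD h ' '))) := by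
  obtain ⟨hL, -⟩ := hI.2.2.1 c hc
  apply List.ext_getElem
  · rw [length_colOf, List.length_append, List.length_replicate, List.length_map,
      List.length_reverse, List.length_range]
    omega
  · intro r h1 h2
    rw [length_colOf] at h1
    rw [getElem_colOf, cell_zeroG]
    rw [if_congr (mem_cellsL_iff_marked hI h2m h2n r c) rfl rfl,
      if_congr (and_iff_right h1) rfl rfl]
    by_cases hrep : r < m.toNat - (cols.getD c []).length
    · rw [List.getElem_append_left (by simpa using hrep), List.getElem_replicate]
      rw [cellPack hI hc h1, if_pos hrep, ite_self]
    · rw [List.getElem_append_right (by simpa using hrep)]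
      simp only [List.length_replicate]
      rw [List.getElem_map, List.getElem_reverse, List.getElem_range]
      simp only [List.length_range]
      have he : (cols.getD c []).length - 1 - (r - (m.toNat - (cols.getD c []).length))
          = m.toNat - 1 - r := by omega
      rw [he, cellPack hI hc h1, if_neg hrep]

theorem filter_mask (S : PySem.Set Int) (f : Nat → Char) :
    ∀ hs : List Nat,
      (hs.map (fun h => if ((h : Nat) : Int) ∈ S then none else some (f h))).filter
          (fun v => v ≠ none)
      = (hs.filter (fun h : Nat => ¬ ((h : Int) ∈ S))).map (fun h => some (f h)) := by
  intro hs
  induction hs with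
  | nil => simp
  | cons a t ih =>
    by_cases hm : ((a : Nat) : Int) ∈ S
    · rw [List.map_cons, if_pos hm, List.filter_cons, List.filter_cons]
      rw [if_neg (by simp), if_neg (by simpa using hm)]
      exact ih
    · rw [List.map_cons, if_neg hm, List.filter_cons, List.filter_cons]
      rw [if_pos (by simp), if_pos (by simpa using hm)]
      rw [ih, List.map_cons]

-- the packed column after zeroing and gravity is exactly B's fresh column
theorem stack_zeroG {m n : Int} {g : Grid} {cols : List (List Char)}
    (hI : InvGB m n g cols) (h2m : 2 ≤ m) (h2n : 2 ≤ n) (c : Nat) (hc : c < n.toNat) :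
    stackOf (zeroG m n g) c m.toNat =
      packCol m.toNat (((List.range (cols.getD c []).length).filter
        (fun h : Nat => ¬ ((h : Int) ∈ (marksB n cols).getD c PySem.Set.empty))).map
          (fun h => (cols.getD c []).getD h ' ')) := by
  unfold stackOf packCol
  rw [colOf_zeroG_eq hI h2m h2n c hc, List.filter_append]
  have hrep0 : (List.replicate (m.toNat - (cols.getD c []).length) (none : Option Char)).filter
      (fun v => v ≠ none) = [] := by simp
  rw [hrep0, List.nil_append, filter_mask, List.filter_reverse]
  congr 1
  · congr 1
    simp
  · simp [List.map_reverse, List.map_map, Function.comp]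

-- ---- one full round preserves the invariant ----

def SZ (m n : Int) (cols : List (List Char)) : Int :=
  ((List.range n.toNat).map (fun c => (m.toNat : Int) - ((cols.getD c []).length : Int))).sum

theorem round_inv {m n : Int} {g : Grid} {cols : List (List Char)}
    (hI : InvGB m n g cols) (h2m : 2 ≤ m) (h2n : 2 ≤ n) :
    InvGB m n (gravG m n (zeroG m n g)) (newColsB cols (marksB n cols)) ∧
    SZ m n (newColsB cols (marksB n cols)) =
      SZ m n cols + ((marksB n cols).map (fun s => (s.length : Int))).sum := by
  obtain ⟨hmlen, hmnd, hmmem⟩ := marksB_spec n cols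
  have hWFz : WF m n (zeroG m n g) := WF_of_sameShape (sameShape_zeroG m n g) hI.1
  obtain ⟨hshG, hcellG⟩ := gravG_cells m n (zeroG m n g) hWFz
  have hclen : cols.length = n.toNat := hI.2.1
  have hnlen : (newColsB cols (marksB n cols)).length = n.toNat := by
    unfold newColsB
    rw [List.length_map, List.length_zip, hclen, hmlen]
    simp
  have hgetD : ∀ c, c < n.toNat → (newColsB cols (marksB n cols)).getD c [] =
      ((List.range (cols.getD c []).length).filter
        (fun h : Nat => ¬ ((h : Int) ∈ (marksB n cols).getD c PySem.Set.empty))).map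
          (fun h => (cols.getD c []).getD h ' ') := by
    intro c hc
    rw [getD_newColsB cols (marksB n cols) c (by omega) (by omega), newcol_eq]
  have hlen' : ∀ c, c < n.toNat → ((newColsB cols (marksB n cols)).getD c []).length =
      (cols.getD c []).length - ((marksB n cols).getD c PySem.Set.empty).length := by
    intro c hc
    rw [hgetD c hc, List.length_map]
    exact newcol_length _ _ (hmnd c) (marks_mem_bound hI c)
  have hSle : ∀ c, c < n.toNat →
      ((marksB n cols).getD c PySem.Set.empty).length ≤ (cols.getD c []).length := by
    intro c hc
    have h1 := List.length_eq_length_filter_add (l := List.range (cols.getD c []).length)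
      (fun h : Nat => decide ((h : Int) ∈ (marksB n cols).getD c PySem.Set.empty))
    rw [List.length_range, filter_mem_length _ _ (hmnd c) (marks_mem_bound hI c)] at h1
    omega
  constructor
  · refine ⟨WF_of_sameShape (sameShape_trans hshG (sameShape_zeroG m n g)) hI.1, hnlen, ?_, ?_⟩
    · intro c hc
      obtain ⟨hLc, -⟩ := hI.2.2.1 c hc
      constructor
      · rw [hlen' c hc]; omega
      · rw [colOf_gravG m n (zeroG m n g) hWFz c hc, stack_zeroG hI h2m h2n c hc, hgetD c hc]
    · intro r hr c hcN hrow
      rw [hcellG r c, if_neg (fun hh => absurd hh.1 (by omega))]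
      have hnotin : ¬ ((r, c) ∈ cellsL m n g) := by
        intro hmem'
        obtain ⟨-, hx⟩ := (mem_cellsL_iff_marked hI h2m h2n r c).1 hmem'
        rw [List.getD_eq_default _ _ (by omega)] at hx
        simp [PySem.Set.empty] at hx
      rw [cell_zeroG, if_neg hnotin]
      apply hI.2.2.2 r hr c hcN
      have e1 := hshG.2 r
      have e2 := (sameShape_zeroG m n g).2 r
      omega
  · unfold SZ
    have hterm : ∀ c ∈ List.range n.toNat,
        (m.toNat : Int) - (((newColsB cols (marksB n cols)).getD c []).length : Int) =
          ((m.toNat : Int) - ((cols.getD c []).length : Int)) +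
            (((marksB n cols).getD c PySem.Set.empty).length : Int) := by
      intro c hc
      rw [List.mem_range] at hc
      rw [hlen' c hc]
      have hle := hSle c hc
      obtain ⟨hLc, -⟩ := hI.2.2.1 c hc
      omega
    rw [List.map_congr_left hterm, PySem.List.sum_map_add_int]
    congr 1
    have hm2 : (marksB n cols).map (fun s => (s.length : Int)) =
        (List.range n.toNat).map
          (fun c => (((marksB n cols).getD c PySem.Set.empty).length : Int)) := by
      conv_lhs => rw [← list_eq_map_range (marksB n cols) PySem.Set.empty]
      rw [List.map_map, hmlen]
      rfl
    rw [hm2]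

-- A's termination flag matches B's
theorem flag_iff_marks {m n : Int} {g : Grid} {cols : List (List Char)}
    (hI : InvGB m n g cols) (h2m : 2 ≤ m) (h2n : 2 ≤ n) :
    (anchorsL m n g = []) ↔ (marksB n cols).all (fun s => s.isEmpty) = true := by
  obtain ⟨hlen, -, hmem⟩ := marksB_spec n cols
  rw [List.all_eq_true]
  constructor
  · intro hA s hs
    rw [List.isEmpty_iff, List.eq_nil_iff_forall_not_mem]
    intro x hxs
    obtain ⟨k, hkl, rfl⟩ := List.mem_iff_getElem.1 hs
    have hx : x ∈ (marksB n cols).getD k PySem.Set.empty := by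
      rw [List.getD_eq_getElem _ _ hkl]; exact hxs
    obtain ⟨c', h', hc', hb, -, -⟩ := (hmem k x).1 hx
    obtain ⟨hL1, -⟩ := hI.2.2.1 c' (by omega)
    have hmem2 : (m.toNat - 2 - h', c') ∈ anchorsL m n g := by
      rw [mem_anchorsL_iff hI h2m h2n]
      have hb1 := hb.1
      refine ⟨by omega, hc', ?_⟩
      have e : m.toNat - 2 - (m.toNat - 2 - h') = h' := by omega
      rw [e]; exact hb
    rw [hA] at hmem2
    simp at hmem2
  · intro hall
    rw [List.eq_nil_iff_forall_not_mem]
    intro p hp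
    rw [mem_anchorsL_iff hI h2m h2n] at hp
    obtain ⟨hi, hj, hb⟩ := hp
    have hx : ((m.toNat - 2 - p.1 : Nat) : Int) ∈ (marksB n cols).getD p.2 PySem.Set.empty :=
      (hmem _ _).2 ⟨p.2, _, hj, hb, Or.inl rfl, Or.inl rfl⟩
    have hp2 : p.2 < (marksB n cols).length := by omega
    have hsm : (marksB n cols).getD p.2 PySem.Set.empty ∈ marksB n cols := by
      rw [List.getD_eq_getElem _ _ hp2]; exact List.getElem_mem _
    have hemp := hall _ hsm
    rw [List.isEmpty_iff] at hemp
    rw [hemp] at hx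
    simp at hx

-- ---- counting ----

def countA (m : Int) (g : Grid) : Int :=
  (List.range m.toNat).foldl (fun a i => a + ((g.getD i []).count none : Int)) 0

theorem count_packCol (M : Nat) (col : List Char) (h : col.length ≤ M) :
    (packCol M col).count none = M - col.length := by
  unfold packCol
  rw [List.count_append]
  have h0 : List.count (none : Option Char) (col.reverse.map some) = 0 := by
    rw [List.count_eq_zero]
    intro hmem
    rw [List.mem_map] at hmem
    obtain ⟨a, -, ha⟩ := hmem
    simp at ha
  rw [h0, List.count_replicate]
  simp

theorem rowcount_eq {m n : Int} {g : Grid} {cols : List (List Char)}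
    (hI : InvGB m n g cols) (r : Nat) (hr : r < m.toNat) :
    (((g.getD r []).count none : Nat) : Int) =
      ((List.range n.toNat).map (fun c => if cellG g r c = none then (1:Int) else 0)).sum := by
  have hN : n.toNat ≤ (g.getD r []).length := hI.1.2 r hr
  rw [count_indicator]
  have hsplit : (g.getD r []).length = n.toNat + ((g.getD r []).length - n.toNat) := by omega
  rw [hsplit, List.range_add, List.map_append, List.sum_append]
  have h2 : ((List.map (fun x => n.toNat + x) (List.range ((g.getD r []).length - n.toNat))).map
      (fun i => if (g.getD r []).getD i none = none then (1:Int) else 0)).sum = 0 := by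
    rw [List.map_map]
    apply List.sum_eq_zero
    intro x hx
    rw [List.mem_map] at hx
    obtain ⟨k, hk, rfl⟩ := hx
    rw [List.mem_range] at hk
    simp only [Function.comp]
    exact if_neg (hI.2.2.2 r hr (n.toNat + k) (by omega) (by omega))
  rw [h2, add_zero]
  rfl

theorem colcount_eq {m n : Int} {g : Grid} {cols : List (List Char)}
    (hI : InvGB m n g cols) (c : Nat) (hc : c < n.toNat) :
    ((List.range m.toNat).map (fun r => if cellG g r c = none then (1:Int) else 0)).sum =
      (m.toNat : Int) - ((cols.getD c []).length : Int) := by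
  obtain ⟨hL, hcol⟩ := hI.2.2.1 c hc
  have h1 := count_indicator (colOf g c m.toNat)
  rw [length_colOf] at h1
  have h2 : (List.range m.toNat).map
      (fun i => if (colOf g c m.toNat).getD i none = none then (1:Int) else 0) =
      (List.range m.toNat).map (fun r => if cellG g r c = none then (1:Int) else 0) := by
    apply List.map_congr_left
    intro i hi
    rw [List.mem_range] at hi
    rw [List.getD_eq_getElem _ _ (by rw [length_colOf]; exact hi), getElem_colOf]
  rw [h2] at h1
  rw [← h1, hcol, count_packCol _ _ hL]
  push_cast [hL]
  omega

theorem countA_eq_SZ {m n : Int} {g : Grid} {cols : List (List Char)}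
    (hI : InvGB m n g cols) : countA m g = SZ m n cols := by
  unfold countA SZ
  rw [PySem.List.foldl_add, zero_add]
  have hrow : ∀ r ∈ List.range m.toNat, (((g.getD r []).count none : Nat) : Int) =
      ((List.range n.toNat).map (fun c => if cellG g r c = none then (1:Int) else 0)).sum :=
    fun r hr => rowcount_eq hI r (List.mem_range.1 hr)
  rw [List.map_congr_left hrow]
  rw [sum_map_range_eq_finset m.toNat
    (fun r => ((List.range n.toNat).map (fun c => if cellG g r c = none then (1:Int) else 0)).sum)]
  have hinner : ∀ r : Nat, ((List.range n.toNat).map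
      (fun c => if cellG g r c = none then (1:Int) else 0)).sum =
      ∑ c ∈ Finset.range n.toNat, (if cellG g r c = none then (1:Int) else 0) :=
    fun r => sum_map_range_eq_finset n.toNat _
  simp only [hinner]
  rw [Finset.sum_comm]
  rw [← sum_map_range_eq_finset n.toNat
    (fun c => ∑ r ∈ Finset.range m.toNat, (if cellG g r c = none then (1:Int) else 0))]
  apply congrArg List.sum
  apply List.map_congr_left
  intro c hc
  rw [← sum_map_range_eq_finset m.toNat (fun r => if cellG g r c = none then (1:Int) else 0)]
  exact colcount_eq hI c (List.mem_range.1 hc)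

theorem toGrid_length (board : List String) : (toGrid board).length = board.length := by
  simp [toGrid]

theorem toGrid_row (board : List String) (r : Nat) (hr : r < board.length) :
    (toGrid board).getD r [] = board[r].toList.map some := by
  unfold toGrid
  rw [List.getD_eq_getElem _ _ (by simp; omega), List.getElem_map]

-- ---- the loops in lockstep ----

theorem loop_lockstep {m n : Int} (h2m : 2 ≤ m) (h2n : 2 ≤ n) :
    ∀ (fuel : Nat) (g : Grid) (cols : List (List Char)) (removed : Int),
      InvGB m n g cols →
      loopB n fuel cols removed = removed - SZ m n cols + countA m (loopA m n fuel g) := by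
  intro fuel
  induction fuel with
  | zero =>
    intro g cols removed hI
    show removed = removed - SZ m n cols + countA m g
    rw [countA_eq_SZ hI]
    ring
  | succ f ih =>
    intro g cols removed hI
    by_cases hA : anchorsL m n g = []
    · have hflag : (bangA m n g).2 = false := by rw [bang_flag]; simp [hA]
      have hmarks : (marksB n cols).all (fun s => s.isEmpty) = true :=
        (flag_iff_marks hI h2m h2n).1 hA
      have hLA : loopA m n (f+1) g = g := by
        rw [loopA]
        simp [hflag]
      have hLB : loopB n (f+1) cols removed = removed := by
        rw [loopB]
        simp [hmarks]
      rw [hLA, hLB, countA_eq_SZ hI]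
      ring
    · have hflag : (bangA m n g).2 = true := by rw [bang_flag]; simp [hA]
      have hmarks : ¬ ((marksB n cols).all (fun s => s.isEmpty) = true) := by
        intro hm
        exact hA ((flag_iff_marks hI h2m h2n).2 hm)
      obtain ⟨hI', hSZ⟩ := round_inv hI h2m h2n
      have hWFz : WF m n (zeroG m n g) := WF_of_sameShape (sameShape_zeroG m n g) hI.1
      have hstepA : loopA m n (f+1) g = loopA m n f (gravG m n (zeroG m n g)) := by
        rw [loopA]
        simp only [hflag, if_true]
        rw [bang_grid, slideA_eq_gravG m n _ hWFz]
      have hstepB : loopB n (f+1) cols removed =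
          loopB n f (newColsB cols (marksB n cols))
            (removed + ((marksB n cols).map (fun s => (s.length : Int))).sum) := by
        rw [loopB]
        simp [hmarks]
      rw [hstepA, hstepB, ih _ _ _ hI', hSZ]
      ring

-- ---- initial state (main case) ----

theorem init_inv (m n : Int) (board : List String) (h2m : 2 ≤ m) (h2n : 2 ≤ n)
    (hmb : m ≤ (board.length : Int))
    (hrows : ∀ s ∈ board.take m.toNat, (n : Int) ≤ (s.length : Int)) :
    InvGB m n (toGrid board) (colsInitB m n board) ∧ SZ m n (colsInitB m n board) = 0 := by
  have hM : 2 ≤ m.toNat := by omega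
  have hN : 2 ≤ n.toNat := by omega
  have hlenb : m.toNat ≤ board.length := by omega
  have hrlen : ∀ r, r < m.toNat → n.toNat ≤ (board.getD r "").length := by
    intro r hr
    have hrb : r < board.length := by omega
    have hh : (board.take m.toNat)[r]'(by simp; omega) = board[r] := List.getElem_take
    have hmemt : board[r] ∈ board.take m.toNat := by
      rw [← hh]
      exact List.getElem_mem _
    have := hrows board[r] hmemt
    rw [List.getD_eq_getElem _ _ hrb]
    omega
  have hcget : ∀ c, c < n.toNat → (colsInitB m n board).getD c [] =
      (List.range m.toNat).map
        (fun k => (board.getD (m.toNat - 1 - k) "").toList.getD c ' ') := by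
    intro c hc
    unfold colsInitB
    rw [PySem.List.getD_map_range _ _ _ _ hc]
    rw [PySem.List.pyRange_neg_one]
    have e1 : ((m - 1) - (-1)).toNat = m.toNat := by omega
    rw [e1, List.map_map]
    apply List.map_congr_left
    intro k hk
    rw [List.mem_range] at hk
    simp only [Function.comp]
    have e2 : ((m - 1 : Int) - (k : Nat)).toNat = m.toNat - 1 - k := by omega
    rw [e2]
  have hclen : ∀ c, c < n.toNat → ((colsInitB m n board).getD c []).length = m.toNat := by
    intro c hc
    rw [hcget c hc, List.length_map, List.length_range]
  have hWF0 : WF m n (toGrid board) := by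
    refine ⟨by rw [toGrid_length]; omega, ?_⟩
    intro r hr
    have hrb : r < board.length := by omega
    rw [toGrid_row board r hrb]
    have := hrlen r hr
    rw [List.getD_eq_getElem _ _ hrb] at this
    simp
    omega
  have hmap_some_getD : ∀ (l : List Char) (c : Nat), c < l.length →
      (l.map some).getD c none = some (l.getD c ' ') := by
    intro l c hcl
    rw [List.getD_eq_getElem _ _ (by simp; omega), List.getElem_map,
      List.getD_eq_getElem _ _ hcl]
  constructor
  · refine ⟨hWF0, by unfold colsInitB; simp, ?_, ?_⟩
    · intro c hc
      refine ⟨by rw [hclen c hc], ?_⟩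
      apply List.ext_getElem
      · rw [length_colOf, length_packCol _ _ (by rw [hclen c hc])]
      · intro r h1 h2
        rw [length_colOf] at h1
        rw [getElem_colOf]
        have hrb : r < board.length := by omega
        have hrowl : c < board[r].toList.length := by
          have := hrlen r h1
          rw [List.getD_eq_getElem _ _ hrb] at this
          simp
          omega
        have hLHS : cellG (toGrid board) r c = some (board[r].toList.getD c ' ') := by
          unfold cellG
          rw [toGrid_row board r hrb]
          exact hmap_some_getD _ c hrowl
        rw [hLHS]
        have hgd := getD_packCol m.toNat ((colsInitB m n board).getD c [])
          (by rw [hclen c hc]) r h1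
        rw [List.getD_eq_getElem _ _ h2] at hgd
        rw [hgd, hclen c hc]
        rw [if_neg (by omega)]
        rw [hcget c hc]
        rw [PySem.List.getD_map_range _ _ _ _ (by omega : m.toNat - 1 - r < m.toNat)]
        have e3 : m.toNat - 1 - (m.toNat - 1 - r) = r := by omega
        rw [e3, List.getD_eq_getElem _ _ hrb]
    · intro r hr c _ hcl
      have hrb : r < board.length := by omega
      unfold cellG
      rw [toGrid_row board r hrb] at hcl ⊢
      rw [List.length_map] at hcl
      rw [hmap_some_getD _ c hcl]
      simp
  · unfold SZ
    apply List.sum_eq_zero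
    intro x hx
    rw [List.mem_map] at hx
    obtain ⟨c, hc, rfl⟩ := hx
    rw [List.mem_range] at hc
    rw [hclen c hc]
    ring

-- ---- degenerate case: no 2x2 block fits ----


theorem solution_degenerate (m n : Int) (board : List String)
    (hpre : Pre_solution m n board) (hdeg : m < 2 ∨ n < 2) :
    solution m n board = 0 := by
  have hA : anchorsL m n (toGrid board) = [] := by
    unfold anchorsL idxsL
    rcases hdeg with h | h
    · have h0 : (m - 1).toNat = 0 := by omega
      rw [h0]
      simp
    · have h0 : (n - 1).toNat = 0 := by omega
      rw [h0]
      simp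
  have hflag : (bangA m n (toGrid board)).2 = false := by rw [bang_flag]; simp [hA]
  have hloop : loopA m n (m.toNat * n.toNat + 1) (toGrid board) = toGrid board := by
    rw [loopA]
    simp [hflag]
  unfold solution
  simp only [hloop]
  rw [PySem.List.foldl_add, zero_add]
  apply List.sum_eq_zero
  intro x hx
  rw [List.mem_map] at hx
  obtain ⟨r, hr, rfl⟩ := hx
  rw [List.mem_range] at hr
  have hrb : r < board.length := by rcases hpre.1 with h | h <;> omega
  rw [toGrid_row board r hrb]
  have h0 : List.count (none : Option Char) (board[r].toList.map some) = 0 := by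
    rw [List.count_eq_zero]
    intro hmem
    rw [List.mem_map] at hmem
    obtain ⟨a, -, ha⟩ := hmem
    simp at ha
  rw [h0]
  rfl

-- ===== VERDICT (by name: the statement is the Claim_ definition above) =====
theorem solution_spec : Claim_equal_solution := by
  unfold Claim_equal_solution
  intro m n board _hdom hpre
  unfold Spec_solution solution_alt
  by_cases hdeg : m < 2 ∨ n < 2
  · rw [if_pos hdeg, solution_degenerate m n board hpre hdeg]
  · rw [if_neg hdeg]
    push_neg at hdeg
    obtain ⟨h2m, h2n⟩ := hdeg
    have hmb : m ≤ (board.length : Int) := by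
      rcases hpre.1 with h | h
      · omega
      · exact h
    obtain ⟨hinv, hsz⟩ := init_inv m n board h2m h2n hmb (hpre.2 h2m h2n)
    have := loop_lockstep h2m h2n (m.toNat * n.toNat + 1) (toGrid board) (colsInitB m n board) 0 hinv
    rw [this, hsz]
    unfold solution countA
    simp
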